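-- pv_equiv track=rewrite | github.com/roberttoyonaga/daily_byte | practice/distance_to_rabbit_holes.py | distance_to_rabbit_holes
-- ===== SOURCE A (Python) =====
-- from collections import deque
--
-- def distance_to_rabbit_holes(arr):
--     ret = []
--     rows = len(arr)
--     cols = len(arr[0])
--     for row in range(rows):
--         ret.append([])
--         for col in range(cols):
--             if arr[row][col]==1:
--                 ret[-1].append(bfs(arr, rows,cols, row, col)) #run bfs whenever we find a rabbit to find closest hole
--             else:
--                 ret[-1].append(arr[row][col])
--     return ret
--
-- def is_valid_move(arr, row, col, visited): #helper
--     if row < 0: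
--         return False
--     elif row >= len(arr):
--         return False
--     elif col < 0:
--         return False
--     elif col >= len(arr[0]):
--         return False
--     elif arr[row][col] == -1:
--         return False
--     elif visited[row][col]:
--         return False
--     else:
--         return True
--
-- def try_visit_node(queue, arr, visited, row, col): #helper
--     if is_valid_move(arr, row,col, visited):
--             queue.append((row, col))
--             visited[row][col] = True
--             if arr[row][col] == 0:
--                 return True
--     return False
--
-- def bfs(arr, rows, cols, row, col): #bfs because we want shortest path
--     visited = []
--     for i in range(rows):
--         visited.append([False]*cols)
--
--     queue = deque([])
--     visited[row][col] = True
--     queue.append( (row,col) )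
--
--     count = 0
--     while queue:
--         count +=1
--         size = len(queue) # need this because we want to calculate distance (count number of levels)
--         for i in range(size):
--             i,j = queue.popleft()
--             if try_visit_node(queue,arr,visited, i, j+1) or try_visit_node(queue,arr,visited, i+1, j) or try_visit_node(queue,arr,visited, i, j-1) or try_visit_node(queue,arr,visited, i-1, j):
--                 return count
-- ===== SOURCE B (Python) =====
-- def distance_to_rabbit_holes(arr):
--     # Multi-source BFS: one breadth-first sweep seeded from all holes at once,
--     # instead of a separate BFS per rabbit (skipped entirely if no rabbit exists).
--     rows = len(arr)
--     cols = len(arr[0])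
--     dist = [[0 if arr[r][c] == 0 else None for c in range(cols)] for r in range(rows)]
--     if any(arr[r][c] == 1 for r in range(rows) for c in range(cols)):
--         queue = [(r, c) for r in range(rows) for c in range(cols) if arr[r][c] == 0]
--         d = 0
--         while queue:
--             d += 1
--             nxt = []
--             for (i, j) in queue:
--                 for (ni, nj) in ((i, j + 1), (i + 1, j), (i, j - 1), (i - 1, j)):
--                     if 0 <= ni < rows and 0 <= nj < cols and arr[ni][nj] != -1 \
--                             and dist[ni][nj] is None:
--                         dist[ni][nj] = d
--                         nxt.append((ni, nj))
--             queue = nxt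
--     return [[dist[r][c] if arr[r][c] == 1 else arr[r][c] for c in range(cols)]
--             for r in range(rows)]
-- ===== Notes on version B (the rewrite author's own statement) =====
-- stated objective: alternative
-- what changed: A runs a fresh visited-matrix BFS from every rabbit cell; B computes all distances in one multi-source BFS sweep seeded from all holes at once (and skips the sweep when the grid has no rabbit), relying on symmetry of grid distance.
import Mathlib
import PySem

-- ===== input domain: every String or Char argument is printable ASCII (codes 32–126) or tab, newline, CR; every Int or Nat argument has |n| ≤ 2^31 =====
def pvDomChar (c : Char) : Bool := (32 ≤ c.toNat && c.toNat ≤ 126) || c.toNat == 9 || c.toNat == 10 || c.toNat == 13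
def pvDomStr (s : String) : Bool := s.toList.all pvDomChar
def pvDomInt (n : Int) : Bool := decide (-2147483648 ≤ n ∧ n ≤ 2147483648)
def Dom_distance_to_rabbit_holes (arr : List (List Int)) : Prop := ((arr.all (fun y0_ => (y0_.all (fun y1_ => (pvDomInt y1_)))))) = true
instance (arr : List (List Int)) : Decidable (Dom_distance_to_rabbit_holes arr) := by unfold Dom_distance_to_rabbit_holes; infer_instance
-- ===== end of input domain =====

-- B replaces A's per-rabbit BFS by a single multi-source BFS sweep seeded from all
-- holes at once (objective: alternative algorithm via symmetry of grid distance).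
-- Return-value equivalence; neither implementation mutates its argument.

-- ===== PORT A =====

-- arr[i][j] (used only after the Python code's own bounds checks)
def getCell (arr : List (List Int)) (i j : Int) : Int :=
  (arr.getD i.toNat []).getD j.toNat 0

-- visited[i][j]
def getB (v : List (List Bool)) (i j : Int) : Bool :=
  (v.getD i.toNat []).getD j.toNat false

-- visited[i][j] = b
def setB (v : List (List Bool)) (i j : Int) (b : Bool) : List (List Bool) :=
  v.set i.toNat ((v.getD i.toNat []).set j.toNat b)

def is_valid_move (arr : List (List Int)) (row col : Int) (visited : List (List Bool)) : Bool :=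
  if row < 0 then false
  else if (arr.length : Int) ≤ row then false
  else if col < 0 then false
  else if ((arr.headD []).length : Int) ≤ col then false
  else if getCell arr row col == -1 then false
  else if getB visited row col then false
  else true

-- returns (found-a-hole, queue, visited)
def try_visit_node (queue : List (Int × Int)) (arr : List (List Int))
    (visited : List (List Bool)) (row col : Int) :
    Bool × List (Int × Int) × List (List Bool) :=
  if is_valid_move arr row col visited then
    let q := queue ++ [(row, col)]
    let v := setB visited row col true
    (getCell arr row col == 0, q, v)
  else (false, queue, visited)

-- the short-circuit or-chain of the four try_visit_node calls for one popped cell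
def visit4 (arr : List (List Int)) (visited : List (List Bool)) (queue : List (Int × Int))
    (i j : Int) : Bool × List (Int × Int) × List (List Bool) :=
  let r1 := try_visit_node queue arr visited i (j+1)
  if r1.1 then r1 else
  let r2 := try_visit_node r1.2.1 arr r1.2.2 (i+1) j
  if r2.1 then r2 else
  let r3 := try_visit_node r2.2.1 arr r2.2.2 i (j-1)
  if r3.1 then r3 else
  try_visit_node r3.2.1 arr r3.2.2 (i-1) j

-- the inner `for i in range(size)` loop; `none` = an early `return count` fired
def processLevel (arr : List (List Int)) :
    Nat → List (Int × Int) → List (List Bool) →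
    Option (List (Int × Int) × List (List Bool))
  | 0, q, v => some (q, v)
  | n+1, q, v =>
    match q with
    | [] => some ([], v)
    | (i, j) :: rest =>
      let r := visit4 arr v rest i j
      if r.1 then none else processLevel arr n r.2.1 r.2.2

-- the `while queue:` loop (fuel rows*cols+1 is proved sufficient below)
def bfsLoop (arr : List (List Int)) :
    Nat → Int → List (Int × Int) → List (List Bool) → Option Int
  | 0, _, _, _ => none
  | fuel+1, count, q, v =>
    if q.isEmpty then none
    else
      match processLevel arr q.length q v with
      | none => some (count + 1)
      | some (q', v') => bfsLoop arr fuel (count + 1) q' v'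

def bfs (arr : List (List Int)) (rows cols : Nat) (row col : Int) : Option Int :=
  let visited := List.replicate rows (List.replicate cols false)
  let visited := setB visited row col true
  bfsLoop arr (rows * cols + 1) 0 [(row, col)] visited

def distance_to_rabbit_holes (arr : List (List Int)) : List (List (Option Int)) :=
  let rows := arr.length
  let cols := (arr.headD []).length
  (List.range rows).map (fun (row : Nat) =>
    (List.range cols).map (fun (col : Nat) =>
      if getCell arr (↑row) (↑col) == 1 then bfs arr rows cols (↑row) (↑col)
      else some (getCell arr (↑row) (↑col))))

-- ===== PORT B =====

-- dist[r][c]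
def dget (dist : List (List (Option Int))) (r c : Nat) : Option Int :=
  (dist.getD r []).getD c none

-- dist[i][j] = v
def dset (dist : List (List (Option Int))) (i j : Int) (v : Option Int) :
    List (List (Option Int)) :=
  dist.set i.toNat ((dist.getD i.toNat []).set j.toNat v)

-- the body of the neighbour `if` in B's inner loop
def try_fill (arr : List (List Int)) (rows cols : Nat) (d : Int)
    (st : List (List (Option Int)) × List (Int × Int)) (ni nj : Int) :
    List (List (Option Int)) × List (Int × Int) :=
  if 0 ≤ ni ∧ ni < (rows : Int) ∧ 0 ≤ nj ∧ nj < (cols : Int) ∧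
     getCell arr ni nj ≠ -1 ∧ dget st.1 ni.toNat nj.toNat = none
  then (dset st.1 ni nj (some d), st.2 ++ [(ni, nj)])
  else st

-- the four neighbours of one dequeued cell, in Python's tuple order
def fill4 (arr : List (List Int)) (rows cols : Nat) (d : Int)
    (st : List (List (Option Int)) × List (Int × Int)) (i j : Int) :
    List (List (Option Int)) × List (Int × Int) :=
  try_fill arr rows cols d
    (try_fill arr rows cols d
      (try_fill arr rows cols d
        (try_fill arr rows cols d st i (j+1)) (i+1) j) i (j-1)) (i-1) j

-- the `while queue:` loop (fuel rows*cols+1 is proved sufficient below)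
def bWhile (arr : List (List Int)) (rows cols : Nat) :
    Nat → Int → List (List (Option Int)) → List (Int × Int) → List (List (Option Int))
  | 0, _, dist, _ => dist
  | fuel+1, d, dist, queue =>
    if queue.isEmpty then dist
    else
      let st := queue.foldl (fun st (p : Int × Int) => fill4 arr rows cols (d+1) st p.1 p.2)
        (dist, [])
      bWhile arr rows cols fuel (d+1) st.1 st.2

def distance_to_rabbit_holes_alt (arr : List (List Int)) : List (List (Option Int)) :=
  let rows := arr.length
  let cols := (arr.headD []).length
  let dist0 := (List.range rows).map (fun (r : Nat) =>
    (List.range cols).map (fun (c : Nat) =>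
      if getCell arr (↑r) (↑c) == 0 then some (0 : Int) else none))
  let dist :=
    if (List.range rows).any (fun (r : Nat) =>
        (List.range cols).any (fun (c : Nat) => getCell arr (↑r) (↑c) == 1)) then
      bWhile arr rows cols (rows * cols + 1) 0 dist0
        ((List.range rows).flatMap (fun (r : Nat) =>
          ((List.range cols).filter (fun (c : Nat) => getCell arr (↑r) (↑c) == 0)).map
            (fun (c : Nat) => ((r : Int), (c : Int)))))
    else dist0
  (List.range rows).map (fun (r : Nat) =>
    (List.range cols).map (fun (c : Nat) =>
      if getCell arr (↑r) (↑c) == 1 then dget dist r c else some (getCell arr (↑r) (↑c))))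

-- ===== PRECONDITION & SPEC =====
-- Pre_ excludes exactly the inputs where Python A raises IndexError: the empty
-- grid (arr[0]) and grids with a row shorter than the first row (arr[row][col]).
def Pre_distance_to_rabbit_holes (arr : List (List Int)) : Prop :=
  arr ≠ [] ∧ ∀ row ∈ arr, (arr.headD []).length ≤ row.length
instance (arr : List (List Int)) : Decidable (Pre_distance_to_rabbit_holes arr) := by
  unfold Pre_distance_to_rabbit_holes; infer_instance

def pvWitness_distance_to_rabbit_holes : List (List Int) := [[1, 0], [-1, 1]]

def Spec_distance_to_rabbit_holes (arr : List (List Int)) (out : List (List (Option Int))) : Prop := out = distance_to_rabbit_holes_alt arr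
instance (arr : List (List Int)) (out : List (List (Option Int))) : Decidable (Spec_distance_to_rabbit_holes arr out) := by unfold Spec_distance_to_rabbit_holes; infer_instance

-- ===== CLAIM (what is proved, stated in full; the proofs are below) =====
def Claim_equal_distance_to_rabbit_holes : Prop := ∀ (arr : List (List Int)), Dom_distance_to_rabbit_holes arr → Pre_distance_to_rabbit_holes arr → Spec_distance_to_rabbit_holes arr (distance_to_rabbit_holes arr)

-- ===== LEMMAS AND PROOFS =====

-- ---- abstract grid notions (proof-side only) ----

def ColsN (arr : List (List Int)) : Nat := (arr.headD []).length

def InGrid (arr : List (List Int)) (p : Int × Int) : Prop :=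
  0 ≤ p.1 ∧ p.1 < (arr.length : Int) ∧ 0 ≤ p.2 ∧ p.2 < (ColsN arr : Int)

def cellP (arr : List (List Int)) (p : Int × Int) : Int := getCell arr p.1 p.2

def Pass (arr : List (List Int)) (p : Int × Int) : Prop :=
  InGrid arr p ∧ cellP arr p ≠ -1

def Adj (p q : Int × Int) : Prop :=
  q = (p.1, p.2+1) ∨ q = (p.1+1, p.2) ∨ q = (p.1, p.2-1) ∨ q = (p.1-1, p.2)

def Ball (arr : List (List Int)) (S : Int × Int → Prop) : Nat → (Int × Int) → Prop
  | 0 => S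
  | n+1 => fun p => Ball arr S n p ∨ (Pass arr p ∧ ∃ q, Ball arr S n q ∧ Adj q p)

def IsZero (arr : List (List Int)) (p : Int × Int) : Prop :=
  InGrid arr p ∧ cellP arr p = 0

def Hit (arr : List (List Int)) (p0 : Int × Int) (d : Nat) : Prop :=
  ∃ z, IsZero arr z ∧ Ball arr (fun x => x = p0) d z

def Vis (v : List (List Bool)) (p : Int × Int) : Prop := getB v p.1 p.2 = true

def Dims (arr : List (List Int)) (v : List (List Bool)) : Prop :=
  v.length = arr.length ∧ ∀ r ∈ v, r.length = ColsN arr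

def Fr (arr : List (List Int)) (p0 : Int × Int) : Nat → (Int × Int) → Prop
  | 0 => fun x => x = p0
  | c+1 => fun x => Ball arr (fun y => y = p0) (c+1) x ∧ ¬ Ball arr (fun y => y = p0) c x

def MeasB (arr : List (List Int)) (v : List (List Bool)) : Nat :=
  (((Finset.range arr.length) ×ˢ (Finset.range (ColsN arr))).filter
     (fun q : Nat × Nat => getB v (q.1 : Int) (q.2 : Int))).card

def IsAnsAux (arr : List (List Int)) (p0 : Int × Int) (c : Nat) (o : Option Int) : Prop :=
  (o = none ∧ ∀ d, ¬ Hit arr p0 d) ∨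
  ∃ d : Nat, c < d ∧ o = some (d:Int) ∧ Hit arr p0 d ∧ ∀ k < d, ¬ Hit arr p0 k

def LD (arr : List (List Int)) (p : Int × Int) (k : Nat) : Prop :=
  Ball arr (IsZero arr) k p ∧ ∀ j < k, ¬ Ball arr (IsZero arr) j p

def MInv (arr : List (List Int)) (c : Nat) (m : List (List (Option Int))) : Prop :=
  (∀ p, InGrid arr p → ¬ Ball arr (IsZero arr) c p → dget m p.1.toNat p.2.toNat = none) ∧
  (∀ p k, InGrid arr p → LD arr p k → k ≤ c → dget m p.1.toNat p.2.toNat = some (k:Int))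

def MeasD (arr : List (List Int)) (m : List (List (Option Int))) : Nat :=
  (((Finset.range arr.length) ×ˢ (Finset.range (ColsN arr))).filter
     (fun q : Nat × Nat => (dget m q.1 q.2).isSome)).card

def FinalChar (arr : List (List Int)) (m : List (List (Option Int))) : Prop :=
  ∀ p, InGrid arr p →
    ((dget m p.1.toNat p.2.toNat = none ∧ ∀ d, ¬ Ball arr (IsZero arr) d p) ∨
     ∃ k : Nat, dget m p.1.toNat p.2.toNat = some (k:Int) ∧ LD arr p k)

-- ---- generic ball lemmas ----

theorem adj_symm {p q : Int × Int} : Adj p q ↔ Adj q p := by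
  rcases p with ⟨a, b⟩; rcases q with ⟨x, y⟩
  unfold Adj
  constructor <;>
  · rintro (h|h|h|h) <;> simp_all [Prod.ext_iff]

theorem ball_mono {arr : List (List Int)} {S : Int × Int → Prop} {k d : Nat}
    (h : k ≤ d) {x : Int × Int} (hx : Ball arr S k x) : Ball arr S d x := by
  induction d with
  | zero =>
    have : k = 0 := by omega
    exact this ▸ hx
  | succ d ih =>
    rcases Nat.lt_or_ge k (d+1) with h' | h'
    · exact Or.inl (ih (by omega))
    · have : k = d + 1 := by omega
      exact this ▸ hx

theorem ball_grid {arr : List (List Int)} {S : Int × Int → Prop}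
    (hS : ∀ s, S s → InGrid arr s) : ∀ n x, Ball arr S n x → InGrid arr x := by
  intro n
  induction n with
  | zero => exact hS
  | succ n ih =>
    rintro x (h | ⟨hp, _⟩)
    · exact ih x h
    · exact hp.1

theorem ball_stab {arr : List (List Int)} {S : Int × Int → Prop} {n : Nat}
    (h : ∀ x, Ball arr S (n+1) x ↔ Ball arr S n x) :
    ∀ m, n ≤ m → ∀ x, Ball arr S m x ↔ Ball arr S n x := by
  intro m
  induction m with
  | zero => intro hm x; have : n = 0 := by omega
            rw [this]
  | succ m ih =>
    intro hm x
    rcases Nat.lt_or_ge n (m+1) with h' | h'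
    · have hnm : n ≤ m := by omega
      constructor
      · rintro (hb | ⟨hp, q, hq, ha⟩)
        · exact (ih hnm x).mp hb
        · exact (h x).mp (Or.inr ⟨hp, q, (ih hnm q).mp hq, ha⟩)
      · intro hb
        exact Or.inl ((ih hnm x).mpr hb)
    · have : n = m + 1 := by omega
      rw [this]

theorem ball_single_front {arr : List (List Int)} {p : Int × Int} (hp : Pass arr p) :
    ∀ n x, Ball arr (fun y => y = p) (n+1) x ↔
      (Ball arr (fun y => y = p) n x ∨
       ∃ m, Adj p m ∧ Pass arr m ∧ Ball arr (fun y => y = m) n x) := by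
  intro n
  induction n with
  | zero =>
    intro x
    constructor
    · rintro (hb | ⟨hpx, q, hq, ha⟩)
      · exact Or.inl hb
      · simp only [Ball] at hq
        subst hq
        exact Or.inr ⟨x, ha, hpx, rfl⟩
    · rintro (hb | ⟨m, ha, hm, hb⟩)
      · exact Or.inl hb
      · simp only [Ball] at hb
        subst hb
        exact Or.inr ⟨hm, p, rfl, ha⟩
  | succ n ih =>
    intro x
    constructor
    · rintro (hb | ⟨hpx, q, hq, ha⟩)
      · rcases (ih x).mp hb with h' | ⟨m, ham, hpm, hbm⟩
        · exact Or.inl (Or.inl h')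
        · exact Or.inr ⟨m, ham, hpm, Or.inl hbm⟩
      · rcases (ih q).mp hq with h' | ⟨m, ham, hpm, hbm⟩
        · exact Or.inl (Or.inr ⟨hpx, q, h', ha⟩)
        · exact Or.inr ⟨m, ham, hpm, Or.inr ⟨hpx, q, hbm, ha⟩⟩
    · rintro (hb | ⟨m, ham, hpm, hbm⟩)
      · exact Or.inl hb
      · rcases hbm with hb' | ⟨hpx, q, hq, ha⟩
        · exact Or.inl ((ih x).mpr (Or.inr ⟨m, ham, hpm, hb'⟩))
        · exact Or.inr ⟨hpx, q, (ih q).mpr (Or.inr ⟨m, ham, hpm, hq⟩), ha⟩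

theorem ball_symm {arr : List (List Int)} {p z : Int × Int}
    (hp : Pass arr p) (hz : Pass arr z) :
    ∀ n, Ball arr (fun y => y = p) n z ↔ Ball arr (fun y => y = z) n p := by
  have key : ∀ n, ∀ p z : Int × Int, Pass arr p → Pass arr z →
      Ball arr (fun y => y = p) n z → Ball arr (fun y => y = z) n p := by
    intro n
    induction n with
    | zero =>
      intro p z _ _ h
      simp only [Ball] at *
      exact h.symm
    | succ n ih =>
      intro p z hp hz h
      rcases (ball_single_front hp n z).mp h with hb | ⟨m, ham, hpm, hbm⟩
      · exact Or.inl (ih p z hp hz hb)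
      · exact Or.inr ⟨hp, m, ih m z hpm hz hbm, adj_symm.mp ham⟩
  intro n
  exact ⟨key n p z hp hz, key n z p hz hp⟩

theorem ball_union {arr : List (List Int)} {S : Int × Int → Prop} :
    ∀ n p, Ball arr S n p ↔ ∃ s, S s ∧ Ball arr (fun y => y = s) n p := by
  intro n
  induction n with
  | zero =>
    intro p
    constructor
    · intro h; exact ⟨p, h, rfl⟩
    · rintro ⟨s, hs, h⟩
      simp only [Ball] at h
      exact h ▸ hs
  | succ n ih =>
    intro p
    constructor
    · rintro (hb | ⟨hpp, q, hq, ha⟩)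
      · obtain ⟨s, hs, h⟩ := (ih p).mp hb
        exact ⟨s, hs, Or.inl h⟩
      · obtain ⟨s, hs, h⟩ := (ih q).mp hq
        exact ⟨s, hs, Or.inr ⟨hpp, q, h, ha⟩⟩
    · rintro ⟨s, hs, hb | ⟨hpp, q, hq, ha⟩⟩
      · exact Or.inl ((ih p).mpr ⟨s, hs, hb⟩)
      · exact Or.inr ⟨hpp, q, (ih q).mpr ⟨s, hs, hq⟩, ha⟩

theorem hit_iff_ballZ {arr : List (List Int)} {p : Int × Int}
    (hp : Pass arr p) (d : Nat) :
    Hit arr p d ↔ Ball arr (IsZero arr) d p := by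
  unfold Hit
  rw [ball_union d p]
  constructor
  · rintro ⟨z, hz, hb⟩
    have hzp : Pass arr z := ⟨hz.1, by rw [hz.2]; decide⟩
    exact ⟨z, hz, (ball_symm hp hzp d).mp hb⟩
  · rintro ⟨z, hz, hb⟩
    have hzp : Pass arr z := ⟨hz.1, by rw [hz.2]; decide⟩
    exact ⟨z, hz, (ball_symm hp hzp d).mpr hb⟩

theorem exists_least {arr : List (List Int)} {p : Int × Int} {c : Nat}
    (h : Ball arr (IsZero arr) c p) : ∃ k ≤ c, LD arr p k := by
  induction c with
  | zero => exact ⟨0, le_refl 0, h, by omega⟩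
  | succ c ih =>
    by_cases hb : Ball arr (IsZero arr) c p
    · obtain ⟨k, hk, hld⟩ := ih hb
      exact ⟨k, by omega, hld⟩
    · refine ⟨c+1, le_refl _, h, ?_⟩
      intro j hj
      exact fun hcon => hb (ball_mono (by omega) hcon)

theorem getB_replicate {R C : Nat} {i j : Int} :
    getB (List.replicate R (List.replicate C false)) i j = false := by
  unfold getB
  simp only [List.getD_eq_getElem?_getD, List.getElem?_replicate]
  split_ifs <;> simp

theorem dims_replicate {arr : List (List Int)} :
    Dims arr (List.replicate arr.length (List.replicate (ColsN arr) false)) := by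
  constructor
  · simp
  · intro r hr
    rw [List.eq_of_mem_replicate hr]
    simp

theorem dims_setB {arr : List (List Int)} {v : List (List Bool)} {i j : Int} {b : Bool}
    (h : Dims arr v) : Dims arr (setB v i j b) := by
  obtain ⟨h1, h2⟩ := h
  refine ⟨by unfold setB; simp [h1], ?_⟩
  intro r hr
  unfold setB at hr
  rcases Nat.lt_or_ge i.toNat v.length with hlt | hge
  · rcases List.mem_or_eq_of_mem_set hr with h' | h'
    · exact h2 r h'
    · subst h'
      rw [List.length_set]
      exact h2 _ (by rw [List.getD_eq_getElem?_getD, List.getElem?_eq_getElem hlt]; exact List.getElem_mem hlt)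
  · have hnone : v.getD i.toNat [] = [] := by
      rw [List.getD_eq_getElem?_getD, List.getElem?_eq_none_iff.mpr (by simpa using hge)]
      rfl
    rw [hnone, List.set_nil, List.set_eq_of_length_le (by omega)] at hr
    exact h2 r hr

theorem getB_setB_self {arr : List (List Int)} {v : List (List Bool)} {p : Int × Int} {b : Bool}
    (hd : Dims arr v) (hg : InGrid arr p) :
    getB (setB v p.1 p.2 b) p.1 p.2 = b := by
  obtain ⟨h1, h2⟩ := hd
  obtain ⟨hg1, hg2, hg3, hg4⟩ := hg
  have hi : p.1.toNat < v.length := by omega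
  have hrow : v[p.1.toNat]?.getD [] = v[p.1.toNat] := by
    rw [List.getElem?_eq_getElem hi]; rfl
  have hrl : v[p.1.toNat].length = ColsN arr := h2 _ (List.getElem_mem hi)
  have hj : p.2.toNat < (v[p.1.toNat]?.getD []).length := by rw [hrow, hrl]; omega
  unfold getB setB
  simp only [List.getD_eq_getElem?_getD]
  rw [List.getElem?_set_self (by simpa using hi)]
  simp only [Option.getD_some]
  rw [List.getElem?_set_self hj]
  rfl

theorem getB_setB_ne {arr : List (List Int)} {v : List (List Bool)} {p x : Int × Int} {b : Bool}
    (hg : InGrid arr p) (hx : InGrid arr x) (hne : x ≠ p) :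
    getB (setB v p.1 p.2 b) x.1 x.2 = getB v x.1 x.2 := by
  obtain ⟨hg1, hg2, hg3, hg4⟩ := hg
  obtain ⟨hx1, hx2, hx3, hx4⟩ := hx
  unfold getB setB
  simp only [List.getD_eq_getElem?_getD]
  by_cases hrow : x.1.toNat = p.1.toNat
  · have hpx1 : x.1 = p.1 := by omega
    have hcol : x.2.toNat ≠ p.2.toNat := by
      intro hc
      exact hne (Prod.ext hpx1 (by omega))
    rw [hrow]
    rcases Nat.lt_or_ge p.1.toNat v.length with hi | hi
    · rw [List.getElem?_set_self (by simpa using hi)]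
      simp only [Option.getD_some]
      rw [List.getElem?_set_ne (by omega)]
    · rw [List.set_eq_of_length_le (by omega)]
  · rw [List.getElem?_set_ne (by omega)]

theorem measB_le {arr : List (List Int)} {v : List (List Bool)} :
    MeasB arr v ≤ arr.length * ColsN arr := by
  unfold MeasB
  calc _ ≤ ((Finset.range arr.length) ×ˢ (Finset.range (ColsN arr))).card :=
        Finset.card_filter_le _ _
    _ = arr.length * ColsN arr := by simp [Finset.card_product]

theorem grid_coords {arr : List (List Int)} {x : Int × Int} (hx : InGrid arr x) :
    x.1.toNat < arr.length ∧ x.2.toNat < ColsN arr ∧ x = ((x.1.toNat : Int), (x.2.toNat : Int)) := by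
  obtain ⟨h1, h2, h3, h4⟩ := hx
  refine ⟨by omega, by omega, ?_⟩
  apply Prod.ext <;> simp <;> omega

theorem measB_lt {arr : List (List Int)} {v v' : List (List Bool)}
    (hmono : ∀ x, InGrid arr x → Vis v x → Vis v' x)
    (hx : ∃ x, InGrid arr x ∧ Vis v' x ∧ ¬ Vis v x) :
    MeasB arr v < MeasB arr v' := by
  unfold MeasB
  apply Finset.card_lt_card
  rw [Finset.ssubset_iff_of_subset]
  · obtain ⟨x, hg, hv', hv⟩ := hx
    obtain ⟨h1, h2, h3, h4⟩ := hg
    have e1 : (x.1.toNat : Int) = x.1 := Int.toNat_of_nonneg h1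
    have e2 : (x.2.toNat : Int) = x.2 := Int.toNat_of_nonneg h3
    refine ⟨(x.1.toNat, x.2.toNat), ?_, ?_⟩
    · rw [Finset.mem_filter]
      constructor
      · rw [Finset.mem_product]
        constructor <;> rw [Finset.mem_range] <;> omega
      · show getB v' _ _ = true
        rw [e1, e2]; exact hv'
    · rw [Finset.mem_filter]
      rintro ⟨-, hcon⟩
      apply hv
      show getB v x.1 x.2 = true
      rw [← e1, ← e2]; exact hcon
  · intro a ha
    rw [Finset.mem_filter] at ha ⊢
    obtain ⟨hmem, hget⟩ := ha
    refine ⟨hmem, ?_⟩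
    rw [Finset.mem_product, Finset.mem_range, Finset.mem_range] at hmem
    have hg : InGrid arr ((a.1 : Int), (a.2 : Int)) := by
      refine ⟨by omega, by omega, by omega, by omega⟩
    exact hmono _ hg hget

theorem is_valid_move_iff {arr : List (List Int)} {row col : Int} {v : List (List Bool)} :
    is_valid_move arr row col v = true ↔
      (Pass arr (row, col) ∧ getB v row col = false) := by
  unfold is_valid_move Pass InGrid cellP ColsN
  split_ifs with h1 h2 h3 h4 h5 h6
  · simp only [false_iff]; rintro ⟨⟨⟨a,b,c,d⟩,-⟩,-⟩; omega
  · simp only [false_iff]; rintro ⟨⟨⟨a,b,c,d⟩,-⟩,-⟩; omega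
  · simp only [false_iff]; rintro ⟨⟨⟨a,b,c,d⟩,-⟩,-⟩; omega
  · simp only [false_iff]; rintro ⟨⟨⟨a,b,c,d⟩,-⟩,-⟩; omega
  · simp only [false_iff]
    rw [beq_iff_eq] at h5
    rintro ⟨⟨-,hc⟩,-⟩
    exact hc h5
  · simp only [false_iff]
    rintro ⟨-,hgb⟩
    rw [h6] at hgb
    exact Bool.true_eq_false.mp hgb
  · simp only [true_iff]
    rw [beq_iff_eq] at h5
    refine ⟨⟨⟨by omega, by omega, by omega, by omega⟩, h5⟩, by simpa using h6⟩

theorem tvn_step {arr : List (List Int)} {v : List (List Bool)} {q : List (Int × Int)}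
    {p : Int × Int} (hd : Dims arr v) :
    (Dims arr (try_visit_node q arr v p.1 p.2).2.2 ∧
     ((try_visit_node q arr v p.1 p.2).1 = true → Pass arr p ∧ ¬ Vis v p ∧ cellP arr p = 0) ∧
     (∀ x, InGrid arr x → (Vis (try_visit_node q arr v p.1 p.2).2.2 x ↔ Vis v x ∨ (x = p ∧ Pass arr p))) ∧
     (∃ ns, (try_visit_node q arr v p.1 p.2).2.1 = q ++ ns ∧
       (∀ x, x ∈ ns ↔ (x = p ∧ Pass arr p ∧ ¬ Vis v p))) ∧
     ((try_visit_node q arr v p.1 p.2).1 = false → Pass arr p → ¬ Vis v p → cellP arr p ≠ 0) ∧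
     (∀ x, InGrid arr x → Vis v x → Vis (try_visit_node q arr v p.1 p.2).2.2 x)) := by
  set r := try_visit_node q arr v p.1 p.2 with hr_def
  by_cases hvm : is_valid_move arr p.1 p.2 v = true
  · obtain ⟨hpass, hgb⟩ := is_valid_move_iff.mp hvm
    have hpass' : Pass arr p := hpass
    have hnvis : ¬ Vis v p := by unfold Vis; rw [hgb]; simp
    have hr : r = ((getCell arr p.1 p.2 == 0), q ++ [(p.1, p.2)], setB v p.1 p.2 true) := by
      rw [hr_def]; unfold try_visit_node; rw [if_pos hvm]
    rw [hr]
    refine ⟨dims_setB hd, ?_, ?_, ?_, ?_, ?_⟩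
    · intro hf
      exact ⟨hpass', hnvis, beq_iff_eq.mp hf⟩
    · intro x hx
      by_cases hxp : x = p
      · subst hxp
        unfold Vis
        rw [getB_setB_self hd hx]
        simp [hpass']
      · unfold Vis
        rw [getB_setB_ne hpass'.1 hx hxp]
        simp [hxp]
    · refine ⟨[(p.1, p.2)], rfl, ?_⟩
      intro x
      simp only [List.mem_singleton]
      constructor
      · rintro rfl
        exact ⟨rfl, hpass', hnvis⟩
      · rintro ⟨rfl, -, -⟩
        rfl
    · intro hf _ _ hc
      rw [show (getCell arr p.1 p.2 == 0) = true from beq_iff_eq.mpr hc] at hf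
      exact Bool.true_eq_false.mp hf
    · intro x hx hvx
      by_cases hxp : x = p
      · subst hxp; unfold Vis; rw [getB_setB_self hd hx]
      · unfold Vis at hvx ⊢; rw [getB_setB_ne hpass'.1 hx hxp]; exact hvx
  · have hr : r = (false, q, v) := by
      rw [hr_def]; simp [try_visit_node, hvm]
    rw [hr]
    have hnv : ¬ (Pass arr p ∧ ¬ Vis v p) := by
      intro ⟨hp, hnvis⟩
      apply hvm
      rw [is_valid_move_iff]
      refine ⟨hp, ?_⟩
      unfold Vis at hnvis
      simpa using hnvis
    refine ⟨hd, by intro h; exact absurd h (by simp), ?_, ?_, ?_, fun x _ h => h⟩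
    · intro x hx
      constructor
      · exact Or.inl
      · rintro (h | ⟨rfl, hp⟩)
        · exact h
        · by_contra hc
          exact hnv ⟨hp, hc⟩
    · refine ⟨[], (List.append_nil q).symm, ?_⟩
      intro x
      simp only [List.not_mem_nil, false_iff]
      rintro ⟨rfl, hp, hnvis⟩
      exact hnv ⟨hp, hnvis⟩
    · intro _ hp hnvis
      exact absurd ⟨hp, hnvis⟩ hnv

theorem visit4_spec {arr : List (List Int)} {v : List (List Bool)} {q : List (Int × Int)}
    {i j : Int} (hd : Dims arr v) :
    (((visit4 arr v q i j).1 = true →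
        ∃ x, Adj (i, j) x ∧ Pass arr x ∧ ¬ Vis v x ∧ cellP arr x = 0) ∧
     ((visit4 arr v q i j).1 = false →
        Dims arr (visit4 arr v q i j).2.2 ∧
        (∀ x, InGrid arr x →
          (Vis (visit4 arr v q i j).2.2 x ↔ Vis v x ∨ (Adj (i, j) x ∧ Pass arr x))) ∧
        (∃ ns, (visit4 arr v q i j).2.1 = q ++ ns ∧
          (∀ x, x ∈ ns ↔ (Adj (i, j) x ∧ Pass arr x ∧ ¬ Vis v x))) ∧
        (∀ x, Adj (i, j) x → Pass arr x → ¬ Vis v x → cellP arr x ≠ 0))) := by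
  have hp21 : ((i+1, j) : Int × Int) ≠ (i, j+1) := by
    intro h; have h1 : i + 1 = i := congrArg Prod.fst h; omega
  have hp31 : ((i, j-1) : Int × Int) ≠ (i, j+1) := by
    intro h; have h1 : j - 1 = j + 1 := congrArg Prod.snd h; omega
  have hp32 : ((i, j-1) : Int × Int) ≠ (i+1, j) := by
    intro h; have h1 : i = i + 1 := congrArg Prod.fst h; omega
  have hp41 : ((i-1, j) : Int × Int) ≠ (i, j+1) := by
    intro h; have h1 : i - 1 = i := congrArg Prod.fst h; omega
  have hp42 : ((i-1, j) : Int × Int) ≠ (i+1, j) := by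
    intro h; have h1 : i - 1 = i + 1 := congrArg Prod.fst h; omega
  have hp43 : ((i-1, j) : Int × Int) ≠ (i, j-1) := by
    intro h; have h1 : i - 1 = i := congrArg Prod.fst h; omega
  have hadj : ∀ x : Int × Int,
      Adj (i, j) x ↔ (x = (i, j+1) ∨ x = (i+1, j) ∨ x = (i, j-1) ∨ x = (i-1, j)) :=
    fun _ => Iff.rfl
  have T1 := @tvn_step arr v q (i, j+1) hd
  dsimp only at T1
  generalize hQ1 : try_visit_node q arr v i (j+1) = r1 at T1
  obtain ⟨hd1, ht1, hv1, ⟨ns1, hQe1, hns1⟩, hz1, hm1⟩ := T1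
  have T2 := @tvn_step arr r1.2.2 r1.2.1 (i+1, j) hd1
  dsimp only at T2
  generalize hQ2 : try_visit_node r1.2.1 arr r1.2.2 (i+1) j = r2 at T2
  obtain ⟨hd2, ht2, hv2, ⟨ns2, hQe2, hns2⟩, hz2, hm2⟩ := T2
  have T3 := @tvn_step arr r2.2.2 r2.2.1 (i, j-1) hd2
  dsimp only at T3
  generalize hQ3 : try_visit_node r2.2.1 arr r2.2.2 i (j-1) = r3 at T3
  obtain ⟨hd3, ht3, hv3, ⟨ns3, hQe3, hns3⟩, hz3, hm3⟩ := T3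
  have T4 := @tvn_step arr r3.2.2 r3.2.1 (i-1, j) hd3
  dsimp only at T4
  generalize hQ4 : try_visit_node r3.2.1 arr r3.2.2 (i-1) j = r4 at T4
  obtain ⟨hd4, ht4, hv4, ⟨ns4, hQe4, hns4⟩, hz4, hm4⟩ := T4
  have hvis : visit4 arr v q i j =
      (if r1.1 = true then r1 else if r2.1 = true then r2
       else if r3.1 = true then r3 else r4) := by
    rw [← hQ4, ← hQ3, ← hQ2, ← hQ1]
    rfl
  by_cases f1 : r1.1 = true
  · rw [hvis, if_pos f1]
    obtain ⟨hp, hnv, hc⟩ := ht1 f1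
    exact ⟨fun _ => ⟨(i, j+1), Or.inl rfl, hp, hnv, hc⟩,
           fun hf => absurd f1 (by rw [hf]; simp)⟩
  · have e2 : Pass arr ((i+1 : Int), j) → (Vis r1.2.2 (i+1, j) ↔ Vis v (i+1, j)) :=
      fun hp => by rw [hv1 _ hp.1]; simp [hp21]
    by_cases f2 : r2.1 = true
    · rw [hvis, if_neg f1, if_pos f2]
      obtain ⟨hp, hnv, hc⟩ := ht2 f2
      have hnv' : ¬ Vis v (i+1, j) := fun hvv => hnv ((e2 hp).mpr hvv)
      exact ⟨fun _ => ⟨(i+1, j), Or.inr (Or.inl rfl), hp, hnv', hc⟩,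
             fun hf => absurd f2 (by rw [hf]; simp)⟩
    · have e3 : Pass arr ((i : Int), j-1) → (Vis r2.2.2 (i, j-1) ↔ Vis v (i, j-1)) :=
        fun hp => by rw [hv2 _ hp.1, hv1 _ hp.1]; simp [hp31, hp32]
      by_cases f3 : r3.1 = true
      · rw [hvis, if_neg f1, if_neg f2, if_pos f3]
        obtain ⟨hp, hnv, hc⟩ := ht3 f3
        have hnv' : ¬ Vis v (i, j-1) := fun hvv => hnv ((e3 hp).mpr hvv)
        exact ⟨fun _ => ⟨(i, j-1), Or.inr (Or.inr (Or.inl rfl)), hp, hnv', hc⟩,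
               fun hf => absurd f3 (by rw [hf]; simp)⟩
      · have f1b : r1.1 = false := by simpa using f1
        have f2b : r2.1 = false := by simpa using f2
        have f3b : r3.1 = false := by simpa using f3
        have e4 : Pass arr ((i-1 : Int), j) → (Vis r3.2.2 (i-1, j) ↔ Vis v (i-1, j)) :=
          fun hp => by rw [hv3 _ hp.1, hv2 _ hp.1, hv1 _ hp.1]; simp [hp41, hp42, hp43]
        rw [hvis, if_neg f1, if_neg f2, if_neg f3]
        constructor
        · intro f4
          obtain ⟨hp, hnv, hc⟩ := ht4 f4
          have hnv' : ¬ Vis v (i-1, j) := fun hvv => hnv ((e4 hp).mpr hvv)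
          exact ⟨(i-1, j), Or.inr (Or.inr (Or.inr rfl)), hp, hnv', hc⟩
        · intro f4b
          refine ⟨hd4, ?_, ?_, ?_⟩
          · intro x hx
            rw [hv4 x hx, hv3 x hx, hv2 x hx, hv1 x hx, hadj x]
            constructor
            · rintro ((((h | ⟨rfl, hp⟩) | ⟨rfl, hp⟩) | ⟨rfl, hp⟩) | ⟨rfl, hp⟩)
              · exact Or.inl h
              · exact Or.inr ⟨Or.inl rfl, hp⟩
              · exact Or.inr ⟨Or.inr (Or.inl rfl), hp⟩
              · exact Or.inr ⟨Or.inr (Or.inr (Or.inl rfl)), hp⟩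
              · exact Or.inr ⟨Or.inr (Or.inr (Or.inr rfl)), hp⟩
            · rintro (h | ⟨(rfl | rfl | rfl | rfl), hp⟩)
              · exact Or.inl (Or.inl (Or.inl (Or.inl h)))
              · exact Or.inl (Or.inl (Or.inl (Or.inr ⟨rfl, hp⟩)))
              · exact Or.inl (Or.inl (Or.inr ⟨rfl, hp⟩))
              · exact Or.inl (Or.inr ⟨rfl, hp⟩)
              · exact Or.inr ⟨rfl, hp⟩
          · refine ⟨ns1 ++ ns2 ++ ns3 ++ ns4, ?_, ?_⟩
            · rw [hQe4, hQe3, hQe2, hQe1]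
              simp [List.append_assoc]
            · intro x
              simp only [List.mem_append, hns1 x, hns2 x, hns3 x, hns4 x, hadj x]
              constructor
              · rintro (((⟨rfl, hp, hnv⟩ | ⟨rfl, hp, hnv⟩) | ⟨rfl, hp, hnv⟩) | ⟨rfl, hp, hnv⟩)
                · exact ⟨Or.inl rfl, hp, hnv⟩
                · exact ⟨Or.inr (Or.inl rfl), hp, fun hvv => hnv ((e2 hp).mpr hvv)⟩
                · exact ⟨Or.inr (Or.inr (Or.inl rfl)), hp, fun hvv => hnv ((e3 hp).mpr hvv)⟩
                · exact ⟨Or.inr (Or.inr (Or.inr rfl)), hp, fun hvv => hnv ((e4 hp).mpr hvv)⟩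
              · rintro ⟨(rfl | rfl | rfl | rfl), hp, hnv⟩
                · exact Or.inl (Or.inl (Or.inl ⟨rfl, hp, hnv⟩))
                · exact Or.inl (Or.inl (Or.inr ⟨rfl, hp, fun hvv => hnv ((e2 hp).mp hvv)⟩))
                · exact Or.inl (Or.inr ⟨rfl, hp, fun hvv => hnv ((e3 hp).mp hvv)⟩)
                · exact Or.inr ⟨rfl, hp, fun hvv => hnv ((e4 hp).mp hvv)⟩
          · intro x hax hp hnv
            rcases (hadj x).mp hax with rfl | rfl | rfl | rfl
            · exact hz1 f1b hp hnv
            · exact hz2 f2b hp (fun hvv => hnv ((e2 hp).mp hvv))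
            · exact hz3 f3b hp (fun hvv => hnv ((e3 hp).mp hvv))
            · exact hz4 f4b hp (fun hvv => hnv ((e4 hp).mp hvv))

theorem processLevel_spec {arr : List (List Int)} :
    ∀ (n : Nat) (q : List (Int × Int)) (v : List (List Bool)), n ≤ q.length → Dims arr v →
    (match processLevel arr n q v with
     | none => ∃ x, Pass arr x ∧ ¬ Vis v x ∧ cellP arr x = 0 ∧ ∃ c ∈ q.take n, Adj c x
     | some (q', v') =>
        Dims arr v' ∧
        (∀ x, InGrid arr x → (Vis v' x ↔ Vis v x ∨ ∃ c ∈ q.take n, Adj c x ∧ Pass arr x)) ∧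
        (∀ x, x ∈ q' ↔ (x ∈ q.drop n ∨ ∃ c ∈ q.take n, Adj c x ∧ Pass arr x ∧ ¬ Vis v x)) ∧
        (∀ x, Pass arr x → ¬ Vis v x → (∃ c ∈ q.take n, Adj c x) → cellP arr x ≠ 0)) := by
  intro n
  induction n with
  | zero =>
    intro q v _ hd
    refine ⟨hd, ?_, ?_, ?_⟩
    · intro x _
      simp
    · intro x
      simp
    · intro x _ _ h
      simp at h
  | succ n ih =>
    intro q v hn hd
    match q with
    | [] => simp at hn
    | (ai, aj) :: rest =>
      have hn' : n ≤ rest.length := by simpa using hn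
      have V := @visit4_spec arr v rest ai aj hd
      by_cases f : (visit4 arr v rest ai aj).1 = true
      · have hpl : processLevel arr (n+1) ((ai, aj) :: rest) v = none := by
          unfold processLevel
          simp only [f, if_pos]
        rw [hpl]
        obtain ⟨x, hax, hp, hnv, hc⟩ := V.1 f
        exact ⟨x, hp, hnv, hc, (ai, aj), by simp [List.take_succ_cons], hax⟩
      · have f' : (visit4 arr v rest ai aj).1 = false := by simpa using f
        obtain ⟨hdm, hvm, ⟨ns, hqe, hns⟩, hzm⟩ := V.2 f'
        have hpl : processLevel arr (n+1) ((ai, aj) :: rest) v =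
            processLevel arr n (visit4 arr v rest ai aj).2.1 (visit4 arr v rest ai aj).2.2 := by
          show (if (visit4 arr v rest ai aj).1 = true then none
                else processLevel arr n (visit4 arr v rest ai aj).2.1 (visit4 arr v rest ai aj).2.2) = _
          rw [if_neg (by simp [f'])]
        rw [hpl]
        have hlen : n ≤ (visit4 arr v rest ai aj).2.1.length := by
          rw [hqe, List.length_append]; omega
        have IH := ih (visit4 arr v rest ai aj).2.1 (visit4 arr v rest ai aj).2.2 hlen hdm
        have htk : (visit4 arr v rest ai aj).2.1.take n = rest.take n := by
          rw [hqe, List.take_append_of_le_length hn']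
        have hdp : (visit4 arr v rest ai aj).2.1.drop n = rest.drop n ++ ns := by
          rw [hqe, List.drop_append_of_le_length hn']
        -- monotonicity of visited during visit4
        have hmono : ∀ x, InGrid arr x → Vis v x → Vis (visit4 arr v rest ai aj).2.2 x :=
          fun x hx hv => (hvm x hx).mpr (Or.inl hv)
        match hres : processLevel arr n (visit4 arr v rest ai aj).2.1 (visit4 arr v rest ai aj).2.2 with
        | none =>
          rw [hres] at IH
          obtain ⟨x, hp, hnv1, hc0, c, hcm, hadjc⟩ := IH
          refine ⟨x, hp, fun hvv => hnv1 (hmono x hp.1 hvv), hc0, c, ?_, hadjc⟩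
          rw [htk] at hcm
          simp [List.take_succ_cons]
          right
          exact hcm
        | some (q', v') =>
          rw [hres] at IH
          obtain ⟨hd', hv', hq', hz'⟩ := IH
          refine ⟨hd', ?_, ?_, ?_⟩
          · intro x hx
            rw [hv' x hx, hvm x hx, htk]
            simp only [List.take_succ_cons, List.mem_cons]
            constructor
            · rintro ((h | ⟨ha, hp⟩) | ⟨c, hc, hac, hp⟩)
              · exact Or.inl h
              · exact Or.inr ⟨(ai, aj), Or.inl rfl, ha, hp⟩
              · exact Or.inr ⟨c, Or.inr hc, hac, hp⟩
            · rintro (h | ⟨c, (rfl | hc), hac, hp⟩)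
              · exact Or.inl (Or.inl h)
              · exact Or.inl (Or.inr ⟨hac, hp⟩)
              · exact Or.inr ⟨c, hc, hac, hp⟩
          · intro x
            rw [hq' x, htk, hdp]
            simp only [List.take_succ_cons, List.drop_succ_cons, List.mem_append, List.mem_cons,
              hns x]
            constructor
            · rintro ((h | h) | ⟨c, hc, hac, hp, hnv1⟩)
              · exact Or.inl h
              · obtain ⟨ha, hp, hnv⟩ := h
                exact Or.inr ⟨(ai, aj), Or.inl rfl, ha, hp, hnv⟩
              · refine Or.inr ⟨c, Or.inr hc, hac, hp, fun hvv => hnv1 (hmono x hp.1 hvv)⟩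
            · rintro (h | ⟨c, (rfl | hc), hac, hp, hnv⟩)
              · exact Or.inl (Or.inl h)
              · exact Or.inl (Or.inr ⟨hac, hp, hnv⟩)
              · by_cases hA : Adj (ai, aj) x ∧ Pass arr x
                · by_cases hV : Vis v x
                  · exact absurd hV hnv
                  · exact Or.inl (Or.inr ⟨hA.1, hA.2, hV⟩)
                · refine Or.inr ⟨c, hc, hac, hp, ?_⟩
                  rw [hvm x hp.1]
                  rintro (hvv | hvv)
                  · exact hnv hvv
                  · exact hA hvv
          · intro x hp hnv ⟨c, hcm, hadjc⟩
            simp only [List.take_succ_cons, List.mem_cons] at hcm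
            rcases hcm with rfl | hcm
            · exact hzm x hadjc hp hnv
            · by_cases hA : Adj (ai, aj) x
              · exact hzm x hA hp hnv
              · refine hz' x hp ?_ ⟨c, by rw [htk]; exact hcm, hadjc⟩
                rw [hvm x hp.1]
                rintro (hvv | hvv)
                · exact hnv hvv
                · exact hA hvv.1

theorem bfsLoop_spec {arr : List (List Int)} {p0 : Int × Int} (hp0 : Pass arr p0) :
    ∀ (fuel c : Nat) (q : List (Int × Int)) (v : List (List Bool)),
    (∀ x, InGrid arr x → (Vis v x ↔ Ball arr (fun y => y = p0) c x)) →
    (∀ x, x ∈ q ↔ Fr arr p0 c x) →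
    (∀ z, IsZero arr z → ¬ Ball arr (fun y => y = p0) c z) →
    Dims arr v →
    arr.length * ColsN arr + 1 ≤ fuel + c →
    c ≤ arr.length * ColsN arr →
    (q ≠ [] → c + 1 ≤ MeasB arr v) →
    IsAnsAux arr p0 c (bfsLoop arr fuel (c : Int) q v) := by
  intro fuel
  induction fuel with
  | zero =>
    intro c q v _ _ _ _ hfuel hc _
    exfalso; omega
  | succ fuel ih =>
    intro c q v hI1 hI2 hI3 hd hfuel hc hM
    have hFrBall : ∀ x, Fr arr p0 c x → Ball arr (fun y => y = p0) c x := by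
      cases c with
      | zero => intro x h; exact h
      | succ k => intro x h; exact h.1
    by_cases hq : q = []
    · subst hq
      have hnone : bfsLoop arr (fuel+1) (c : Int) [] v = none := rfl
      rw [hnone]
      left
      refine ⟨rfl, ?_⟩
      match c with
      | 0 =>
        exact absurd ((hI2 p0).mpr rfl) (List.not_mem_nil)
      | k+1 =>
        have hstab : ∀ x, Ball arr (fun y => y = p0) (k+1) x ↔ Ball arr (fun y => y = p0) k x := by
          intro x
          constructor
          · intro hb
            by_contra hnb
            exact absurd ((hI2 x).mpr ⟨hb, hnb⟩) (List.not_mem_nil)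
          · exact ball_mono (by omega)
        intro d hhit
        obtain ⟨z, hz, hbz⟩ := hhit
        have hbz' : Ball arr (fun y => y = p0) (k+1) z := by
          rcases Nat.le_total d (k+1) with h' | h'
          · exact ball_mono h' hbz
          · exact ball_mono (by omega) ((ball_stab hstab d (by omega) z).mp hbz)
        exact hI3 z hz hbz'
    · have PS := @processLevel_spec arr q.length q v (le_refl _) hd
      have hbfs : bfsLoop arr (fuel+1) (c : Int) q v =
          (match processLevel arr q.length q v with
           | none => some ((c : Int) + 1)
           | some (q', v') => bfsLoop arr fuel ((c : Int) + 1) q' v') := by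
        show (if q.isEmpty = true then none else _) = _
        rw [if_neg (by simpa [List.isEmpty_iff] using hq)]
      rw [hbfs]
      have hdecomp : ∀ x, Ball arr (fun y => y = p0) (c+1) x →
          ¬ Ball arr (fun y => y = p0) c x →
          Pass arr x ∧ ∃ b, Fr arr p0 c b ∧ Adj b x := by
        intro x hb hnb
        rcases hb with hb | ⟨hpx, b, hbb, hab⟩
        · exact absurd hb hnb
        · refine ⟨hpx, b, ?_, hab⟩
          match c with
          | 0 => exact hbb
          | k+1 =>
            refine ⟨hbb, fun hbk => hnb (Or.inr ⟨hpx, b, hbk, hab⟩)⟩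
      match hres : processLevel arr q.length q v with
      | none =>
        rw [hres] at PS
        simp only [List.take_length] at PS
        obtain ⟨x, hpx, hnvx, hc0, b, hbq, hab⟩ := PS
        right
        refine ⟨c+1, by omega, by push_cast; rfl, ?_, ?_⟩
        · have hbball : Ball arr (fun y => y = p0) c b := hFrBall b ((hI2 b).mp hbq)
          exact ⟨x, ⟨hpx.1, hc0⟩, Or.inr ⟨hpx, b, hbball, hab⟩⟩
        · rintro k hk ⟨z, hz, hbz⟩
          exact hI3 z hz (ball_mono (by omega) hbz)
      | some (q', v') =>
        rw [hres] at PS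
        simp only [List.take_length, List.drop_length] at PS
        obtain ⟨hd', hvm, hqm, hzm⟩ := PS
        have hI1' : ∀ x, InGrid arr x → (Vis v' x ↔ Ball arr (fun y => y = p0) (c+1) x) := by
          intro x hx
          rw [hvm x hx]
          constructor
          · rintro (hv | ⟨b, hbq, hab, hpx⟩)
            · exact ball_mono (by omega) ((hI1 x hx).mp hv)
            · exact Or.inr ⟨hpx, b, hFrBall b ((hI2 b).mp hbq), hab⟩
          · intro hb
            by_cases hbc : Ball arr (fun y => y = p0) c x
            · exact Or.inl ((hI1 x hx).mpr hbc)
            · obtain ⟨hpx, b, hfr, hab⟩ := hdecomp x hb hbc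
              exact Or.inr ⟨b, (hI2 b).mpr hfr, hab, hpx⟩
        have hI2' : ∀ x, x ∈ q' ↔ Fr arr p0 (c+1) x := by
          intro x
          rw [hqm x]
          constructor
          · rintro (h | ⟨b, hbq, hab, hpx, hnv⟩)
            · exact absurd h (List.not_mem_nil)
            · have hnbc : ¬ Ball arr (fun y => y = p0) c x :=
                fun hbc => hnv ((hI1 x hpx.1).mpr hbc)
              exact ⟨Or.inr ⟨hpx, b, hFrBall b ((hI2 b).mp hbq), hab⟩, hnbc⟩
          · rintro ⟨hb, hnb⟩
            obtain ⟨hpx, b, hfr, hab⟩ := hdecomp x hb hnb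
            exact Or.inr ⟨b, (hI2 b).mpr hfr, hab, hpx,
              fun hvv => hnb ((hI1 x hpx.1).mp hvv)⟩
        have hI3' : ∀ z, IsZero arr z → ¬ Ball arr (fun y => y = p0) (c+1) z := by
          intro z hz hb
          by_cases hbc : Ball arr (fun y => y = p0) c z
          · exact hI3 z hz hbc
          · obtain ⟨hpz, b, hfr, hab⟩ := hdecomp z hb hbc
            exact hzm z hpz (fun hvv => hbc ((hI1 z hpz.1).mp hvv))
              ⟨b, (hI2 b).mpr hfr, hab⟩ hz.2
        have hMv : c + 1 ≤ MeasB arr v := hM hq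
        have hc' : c + 1 ≤ arr.length * ColsN arr :=
          le_trans hMv (measB_le)
        have hM' : q' ≠ [] → c + 2 ≤ MeasB arr v' := by
          intro hne
          obtain ⟨x, hxq⟩ := List.exists_mem_of_ne_nil q' hne
          obtain ⟨hb, hnb⟩ := (hI2' x).mp hxq
          have hxg : InGrid arr x :=
            ball_grid (fun s hs => hs ▸ hp0.1) (c+1) x hb
          have hlt : MeasB arr v < MeasB arr v' := by
            apply measB_lt
            · intro y hy hv
              exact (hI1' y hy).mpr (ball_mono (by omega) ((hI1 y hy).mp hv))
            · exact ⟨x, hxg, (hI1' x hxg).mpr hb,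
                fun hvv => hnb ((hI1 x hxg).mp hvv)⟩
          omega
        have IHres := ih (c+1) q' v' hI1' hI2' hI3' hd' (by omega) hc' hM'
        have hcast : ((c : Int) + 1) = (((c+1 : Nat)) : Int) := by push_cast; rfl
        rw [hcast]
        rcases IHres with ⟨h1, h2⟩ | ⟨d, hd1, hd2, hd3, hd4⟩
        · exact Or.inl ⟨h1, h2⟩
        · exact Or.inr ⟨d, by omega, hd2, hd3, hd4⟩

theorem bfs_correct {arr : List (List Int)} {r0 c0 : Nat}
    (hr : r0 < arr.length) (hc : c0 < ColsN arr)
    (hcell : cellP arr ((r0 : Int), (c0 : Int)) = 1) :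
    IsAnsAux arr ((r0 : Int), (c0 : Int)) 0
      (bfs arr arr.length (ColsN arr) (r0 : Int) (c0 : Int)) := by
  set p0 : Int × Int := ((r0 : Int), (c0 : Int)) with hp0def
  have hg0 : InGrid arr p0 := by
    rw [hp0def]; refine ⟨?_, ?_, ?_, ?_⟩ <;> simp <;> omega
  have hp0 : Pass arr p0 := ⟨hg0, by rw [show cellP arr p0 = 1 from hcell]; decide⟩
  have hblank : Dims arr (List.replicate arr.length (List.replicate (ColsN arr) false)) :=
    dims_replicate
  have hdv : Dims arr (setB (List.replicate arr.length (List.replicate (ColsN arr) false))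
      p0.1 p0.2 true) := dims_setB hblank
  have hbfseq : bfs arr arr.length (ColsN arr) (r0 : Int) (c0 : Int) =
      bfsLoop arr (arr.length * ColsN arr + 1) ((0 : Nat) : Int) [p0]
        (setB (List.replicate arr.length (List.replicate (ColsN arr) false)) p0.1 p0.2 true) := by
    rfl
  rw [hbfseq]
  apply bfsLoop_spec hp0
  · intro x hx
    by_cases hxp : x = p0
    · subst hxp
      unfold Vis
      rw [getB_setB_self hblank hg0]
      simp
      exact rfl
    · unfold Vis
      rw [getB_setB_ne hg0 hx hxp, getB_replicate]
      simp
      exact fun h => absurd h hxp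
  · intro x
    simp only [List.mem_singleton]
    exact Iff.rfl
  · intro z hz hb
    have hzp : z = p0 := hb
    rw [hzp] at hz
    have h0 : cellP arr p0 = 0 := hz.2
    rw [hcell] at h0
    exact absurd h0 (by decide)
  · exact hdv
  · omega
  · omega
  · intro _
    have hlt : MeasB arr (List.replicate arr.length (List.replicate (ColsN arr) false)) <
        MeasB arr (setB (List.replicate arr.length (List.replicate (ColsN arr) false))
          p0.1 p0.2 true) := by
      apply measB_lt
      · intro y _ hv
        unfold Vis at hv
        rw [getB_replicate] at hv
        exact absurd hv (by decide)
      · refine ⟨p0, hg0, ?_, ?_⟩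
        · unfold Vis
          rw [getB_setB_self hblank hg0]
        · unfold Vis
          rw [getB_replicate]
          exact by decide
    omega

-- ---- B-side correctness ----
def FrZ (arr : List (List Int)) : Nat → (Int × Int) → Prop
  | 0 => IsZero arr
  | c+1 => fun x => Ball arr (IsZero arr) (c+1) x ∧ ¬ Ball arr (IsZero arr) c x

def CandZ (arr : List (List Int)) (m : List (List (Option Int))) (p : Int × Int) : Prop :=
  Pass arr p ∧ dget m p.1.toNat p.2.toNat = none

def DimsD (arr : List (List Int)) (m : List (List (Option Int))) : Prop :=
  m.length = arr.length ∧ ∀ r ∈ m, r.length = ColsN arr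

theorem dget_map {R C : Nat} {G : Nat → Nat → Option Int} {i j : Nat} :
    dget ((List.range R).map (fun r => (List.range C).map (fun c => G r c))) i j =
      if i < R ∧ j < C then G i j else none := by
  unfold dget
  rcases Nat.lt_or_ge i R with hi | hi
  · rcases Nat.lt_or_ge j C with hj | hj
    · rw [if_pos ⟨hi, hj⟩]
      rw [List.getD_eq_getElem?_getD, List.getD_eq_getElem?_getD,
          List.getElem?_map, List.getElem?_range hi]
      simp only [Option.map_some, Option.getD_some]
      rw [List.getElem?_map, List.getElem?_range hj]
      simp
    · rw [if_neg (by omega)]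
      rw [List.getD_eq_getElem?_getD, List.getD_eq_getElem?_getD,
          List.getElem?_map, List.getElem?_range hi]
      simp only [Option.map_some, Option.getD_some]
      rw [List.getElem?_map,
          show (List.range C)[j]? = none from List.getElem?_eq_none_iff.mpr (by simpa using hj)]
      simp
  · rw [if_neg (by omega)]
    rw [List.getD_eq_getElem?_getD, List.getD_eq_getElem?_getD,
        List.getElem?_map,
        show (List.range R)[i]? = none from List.getElem?_eq_none_iff.mpr (by simpa using hi)]
    simp

theorem measD_le {arr : List (List Int)} {m : List (List (Option Int))} :
    MeasD arr m ≤ arr.length * ColsN arr := by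
  unfold MeasD
  calc _ ≤ ((Finset.range arr.length) ×ˢ (Finset.range (ColsN arr))).card :=
        Finset.card_filter_le _ _
    _ = arr.length * ColsN arr := by simp [Finset.card_product]

theorem measD_lt {arr : List (List Int)} {m m' : List (List (Option Int))}
    (hmono : ∀ i j, i < arr.length → j < ColsN arr →
      (dget m i j).isSome = true → (dget m' i j).isSome = true)
    (hx : ∃ i j, i < arr.length ∧ j < ColsN arr ∧
      (dget m' i j).isSome = true ∧ ¬ (dget m i j).isSome = true) :
    MeasD arr m < MeasD arr m' := by
  unfold MeasD
  apply Finset.card_lt_card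
  rw [Finset.ssubset_iff_of_subset]
  · obtain ⟨i, j, hi, hj, hs', hs⟩ := hx
    refine ⟨(i, j), ?_, ?_⟩
    · rw [Finset.mem_filter]
      exact ⟨by rw [Finset.mem_product]; simp [Finset.mem_range]; omega, hs'⟩
    · rw [Finset.mem_filter]
      rintro ⟨-, hcon⟩
      exact hs hcon
  · intro a ha
    rw [Finset.mem_filter] at ha ⊢
    obtain ⟨hmem, hget⟩ := ha
    refine ⟨hmem, ?_⟩
    rw [Finset.mem_product, Finset.mem_range, Finset.mem_range] at hmem
    exact hmono a.1 a.2 hmem.1 hmem.2 hget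

theorem measD_pos {arr : List (List Int)} {m : List (List (Option Int))}
    (h : ∃ p, InGrid arr p ∧ (dget m p.1.toNat p.2.toNat).isSome = true) :
    1 ≤ MeasD arr m := by
  obtain ⟨p, hp, hs⟩ := h
  obtain ⟨hi, hj, -⟩ := grid_coords hp
  unfold MeasD
  rw [Nat.one_le_iff_ne_zero, ← Nat.pos_iff_ne_zero, Finset.card_pos]
  refine ⟨(p.1.toNat, p.2.toNat), ?_⟩
  rw [Finset.mem_filter]
  exact ⟨by rw [Finset.mem_product]; simp [Finset.mem_range]; omega, hs⟩

theorem dimsD_dset {arr : List (List Int)} {m : List (List (Option Int))} {i j : Int}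
    {v : Option Int} (h : DimsD arr m) : DimsD arr (dset m i j v) := by
  obtain ⟨h1, h2⟩ := h
  refine ⟨by unfold dset; simp [h1], ?_⟩
  intro r hr
  unfold dset at hr
  rcases Nat.lt_or_ge i.toNat m.length with hlt | hge
  · rcases List.mem_or_eq_of_mem_set hr with h' | h'
    · exact h2 r h'
    · subst h'
      rw [List.length_set]
      exact h2 _ (by rw [List.getD_eq_getElem?_getD, List.getElem?_eq_getElem hlt]; exact List.getElem_mem hlt)
  · have hnone : m.getD i.toNat [] = [] := by
      rw [List.getD_eq_getElem?_getD, List.getElem?_eq_none_iff.mpr (by simpa using hge)]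
      rfl
    rw [hnone, List.set_nil, List.set_eq_of_length_le (by omega)] at hr
    exact h2 r hr

theorem dget_dset_self {arr : List (List Int)} {m : List (List (Option Int))} {p : Int × Int}
    {v : Option Int} (hd : DimsD arr m) (hg : InGrid arr p) :
    dget (dset m p.1 p.2 v) p.1.toNat p.2.toNat = v := by
  obtain ⟨h1, h2⟩ := hd
  obtain ⟨hg1, hg2, hg3, hg4⟩ := hg
  have hi : p.1.toNat < m.length := by omega
  have hrow : m[p.1.toNat]?.getD [] = m[p.1.toNat] := by
    rw [List.getElem?_eq_getElem hi]; rfl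
  have hrl : m[p.1.toNat].length = ColsN arr := h2 _ (List.getElem_mem hi)
  have hj : p.2.toNat < (m[p.1.toNat]?.getD []).length := by rw [hrow, hrl]; omega
  unfold dget dset
  simp only [List.getD_eq_getElem?_getD]
  rw [List.getElem?_set_self (by simpa using hi)]
  simp only [Option.getD_some]
  rw [List.getElem?_set_self hj]
  rfl

theorem dget_dset_ne {arr : List (List Int)} {m : List (List (Option Int))} {p x : Int × Int}
    {v : Option Int} (hg : InGrid arr p) (hx : InGrid arr x) (hne : x ≠ p) :
    dget (dset m p.1 p.2 v) x.1.toNat x.2.toNat = dget m x.1.toNat x.2.toNat := by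
  obtain ⟨hg1, hg2, hg3, hg4⟩ := hg
  obtain ⟨hx1, hx2, hx3, hx4⟩ := hx
  unfold dget dset
  simp only [List.getD_eq_getElem?_getD]
  by_cases hrow : x.1.toNat = p.1.toNat
  · have hpx1 : x.1 = p.1 := by omega
    have hcol : x.2.toNat ≠ p.2.toNat := by
      intro hc
      exact hne (Prod.ext hpx1 (by omega))
    rw [hrow]
    rcases Nat.lt_or_ge p.1.toNat m.length with hi | hi
    · rw [List.getElem?_set_self (by simpa using hi)]
      simp only [Option.getD_some]
      rw [List.getElem?_set_ne (by omega)]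
    · rw [List.set_eq_of_length_le (by omega)]
  · rw [List.getElem?_set_ne (by omega)]

theorem try_fill_spec {arr : List (List Int)} {d : Int}
    {st : List (List (Option Int)) × List (Int × Int)} {p : Int × Int}
    (hd : DimsD arr st.1) :
    DimsD arr (try_fill arr arr.length (ColsN arr) d st p.1 p.2).1 ∧
    (∀ x, InGrid arr x → x ≠ p →
      dget (try_fill arr arr.length (ColsN arr) d st p.1 p.2).1 x.1.toNat x.2.toNat =
      dget st.1 x.1.toNat x.2.toNat) ∧
    (CandZ arr st.1 p →
      dget (try_fill arr arr.length (ColsN arr) d st p.1 p.2).1 p.1.toNat p.2.toNat = some d ∧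
      (try_fill arr arr.length (ColsN arr) d st p.1 p.2).2 = st.2 ++ [p]) ∧
    (¬ CandZ arr st.1 p → try_fill arr arr.length (ColsN arr) d st p.1 p.2 = st) := by
  have hiff : (0 ≤ p.1 ∧ p.1 < (arr.length : Int) ∧ 0 ≤ p.2 ∧ p.2 < ((ColsN arr) : Int) ∧
      getCell arr p.1 p.2 ≠ -1 ∧ dget st.1 p.1.toNat p.2.toNat = none) ↔ CandZ arr st.1 p := by
    unfold CandZ Pass InGrid cellP
    tauto
  by_cases hc : CandZ arr st.1 p
  · have hres : try_fill arr arr.length (ColsN arr) d st p.1 p.2 =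
        (dset st.1 p.1 p.2 (some d), st.2 ++ [(p.1, p.2)]) := by
      unfold try_fill
      rw [if_pos (hiff.mpr hc)]
    rw [hres]
    refine ⟨dimsD_dset hd, ?_, ?_, ?_⟩
    · intro x hx hne
      exact dget_dset_ne hc.1.1 hx hne
    · intro _
      exact ⟨dget_dset_self hd hc.1.1, rfl⟩
    · intro hnc
      exact absurd hc hnc
  · have hres : try_fill arr arr.length (ColsN arr) d st p.1 p.2 = st := by
      unfold try_fill
      rw [if_neg (fun h => hc (hiff.mp h))]
    rw [hres]
    exact ⟨hd, fun x _ _ => rfl, fun h => absurd h hc, fun _ => rfl⟩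

theorem fill4_spec {arr : List (List Int)} {d : Int}
    {st : List (List (Option Int)) × List (Int × Int)} {i j : Int}
    (hd : DimsD arr st.1) :
    DimsD arr (fill4 arr arr.length (ColsN arr) d st i j).1 ∧
    (∀ x, InGrid arr x → ¬ Adj (i, j) x →
      dget (fill4 arr arr.length (ColsN arr) d st i j).1 x.1.toNat x.2.toNat =
      dget st.1 x.1.toNat x.2.toNat) ∧
    (∀ x, Adj (i, j) x → CandZ arr st.1 x →
      dget (fill4 arr arr.length (ColsN arr) d st i j).1 x.1.toNat x.2.toNat = some d) ∧
    (∀ x, InGrid arr x → ¬ CandZ arr st.1 x →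
      dget (fill4 arr arr.length (ColsN arr) d st i j).1 x.1.toNat x.2.toNat =
      dget st.1 x.1.toNat x.2.toNat) ∧
    (∃ ns, (fill4 arr arr.length (ColsN arr) d st i j).2 = st.2 ++ ns ∧
      ∀ x, x ∈ ns ↔ (Adj (i, j) x ∧ CandZ arr st.1 x)) := by
  have hp21 : ((i+1, j) : Int × Int) ≠ (i, j+1) := by
    intro h; have h1 : i + 1 = i := congrArg Prod.fst h; omega
  have hp31 : ((i, j-1) : Int × Int) ≠ (i, j+1) := by
    intro h; have h1 : j - 1 = j + 1 := congrArg Prod.snd h; omega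
  have hp32 : ((i, j-1) : Int × Int) ≠ (i+1, j) := by
    intro h; have h1 : i = i + 1 := congrArg Prod.fst h; omega
  have hp41 : ((i-1, j) : Int × Int) ≠ (i, j+1) := by
    intro h; have h1 : i - 1 = i := congrArg Prod.fst h; omega
  have hp42 : ((i-1, j) : Int × Int) ≠ (i+1, j) := by
    intro h; have h1 : i - 1 = i + 1 := congrArg Prod.fst h; omega
  have hp43 : ((i-1, j) : Int × Int) ≠ (i, j-1) := by
    intro h; have h1 : i - 1 = i := congrArg Prod.fst h; omega
  have hadj : ∀ x : Int × Int,
      Adj (i, j) x ↔ (x = (i, j+1) ∨ x = (i+1, j) ∨ x = (i, j-1) ∨ x = (i-1, j)) :=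
    fun _ => Iff.rfl
  have T1 := @try_fill_spec arr d st (i, j+1) hd
  dsimp only at T1
  generalize hQ1 : try_fill arr arr.length (ColsN arr) d st i (j+1) = s1 at T1
  obtain ⟨hd1, hu1, hs1, hk1⟩ := T1
  have T2 := @try_fill_spec arr d s1 (i+1, j) hd1
  dsimp only at T2
  generalize hQ2 : try_fill arr arr.length (ColsN arr) d s1 (i+1) j = s2 at T2
  obtain ⟨hd2, hu2, hs2, hk2⟩ := T2
  have T3 := @try_fill_spec arr d s2 (i, j-1) hd2
  dsimp only at T3
  generalize hQ3 : try_fill arr arr.length (ColsN arr) d s2 i (j-1) = s3 at T3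
  obtain ⟨hd3, hu3, hs3, hk3⟩ := T3
  have T4 := @try_fill_spec arr d s3 (i-1, j) hd3
  dsimp only at T4
  generalize hQ4 : try_fill arr arr.length (ColsN arr) d s3 (i-1) j = s4 at T4
  obtain ⟨hd4, hu4, hs4, hk4⟩ := T4
  have hfl : fill4 arr arr.length (ColsN arr) d st i j = s4 := by
    rw [← hQ4, ← hQ3, ← hQ2, ← hQ1]
    rfl
  rw [hfl]
  -- each candidate point keeps its st-value until its own step fires
  have e2 : InGrid arr ((i+1 : Int), j) →
      dget s1.1 ((i+1 : Int), j).1.toNat ((i+1 : Int), j).2.toNat =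
      dget st.1 ((i+1 : Int), j).1.toNat ((i+1 : Int), j).2.toNat :=
    fun hg => hu1 _ hg hp21
  have e3 : InGrid arr ((i : Int), j-1) →
      dget s2.1 ((i : Int), j-1).1.toNat ((i : Int), j-1).2.toNat =
      dget st.1 ((i : Int), j-1).1.toNat ((i : Int), j-1).2.toNat :=
    fun hg => by rw [hu2 _ hg hp32, hu1 _ hg hp31]
  have e4 : InGrid arr ((i-1 : Int), j) →
      dget s3.1 ((i-1 : Int), j).1.toNat ((i-1 : Int), j).2.toNat =
      dget st.1 ((i-1 : Int), j).1.toNat ((i-1 : Int), j).2.toNat :=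
    fun hg => by rw [hu3 _ hg hp43, hu2 _ hg hp42, hu1 _ hg hp41]
  have hc2 : CandZ arr s1.1 (i+1, j) ↔ CandZ arr st.1 (i+1, j) := by
    unfold CandZ
    by_cases hg : InGrid arr ((i+1 : Int), j)
    · rw [e2 hg]
    · constructor <;> (rintro ⟨hp, -⟩; exact absurd hp.1 hg)
  have hc3 : CandZ arr s2.1 (i, j-1) ↔ CandZ arr st.1 (i, j-1) := by
    unfold CandZ
    by_cases hg : InGrid arr ((i : Int), j-1)
    · rw [e3 hg]
    · constructor <;> (rintro ⟨hp, -⟩; exact absurd hp.1 hg)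
  have hc4 : CandZ arr s3.1 (i-1, j) ↔ CandZ arr st.1 (i-1, j) := by
    unfold CandZ
    by_cases hg : InGrid arr ((i-1 : Int), j)
    · rw [e4 hg]
    · constructor <;> (rintro ⟨hp, -⟩; exact absurd hp.1 hg)
  refine ⟨hd4, ?_, ?_, ?_, ?_⟩
  · intro x hx hna
    rw [hadj] at hna
    push_neg at hna
    rw [hu4 _ hx hna.2.2.2, hu3 _ hx hna.2.2.1, hu2 _ hx hna.2.1, hu1 _ hx hna.1]
  · intro x hax hcx
    have hgx : InGrid arr x := hcx.1.1
    rcases (hadj x).mp hax with rfl | rfl | rfl | rfl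
    · obtain ⟨hv, -⟩ := hs1 hcx
      rw [hu4 _ hgx (Ne.symm hp41), hu3 _ hgx (Ne.symm hp31), hu2 _ hgx (Ne.symm hp21)]
      exact hv
    · obtain ⟨hv, -⟩ := hs2 (hc2.mpr hcx)
      rw [hu4 _ hgx (Ne.symm hp42), hu3 _ hgx (Ne.symm hp32)]
      exact hv
    · obtain ⟨hv, -⟩ := hs3 (hc3.mpr hcx)
      rw [hu4 _ hgx (Ne.symm hp43)]
      exact hv
    · obtain ⟨hv, -⟩ := hs4 (hc4.mpr hcx)
      exact hv
  · intro x hx hnc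
    by_cases hax : Adj (i, j) x
    · rcases (hadj x).mp hax with rfl | rfl | rfl | rfl
      · rw [hu4 _ hx (Ne.symm hp41), hu3 _ hx (Ne.symm hp31), hu2 _ hx (Ne.symm hp21),
            hk1 hnc]
      · rw [hu4 _ hx (Ne.symm hp42), hu3 _ hx (Ne.symm hp32),
            hk2 (fun h => hnc (hc2.mp h)), hu1 _ hx hp21]
      · rw [hu4 _ hx (Ne.symm hp43), hk3 (fun h => hnc (hc3.mp h)),
            hu2 _ hx hp32, hu1 _ hx hp31]
      · rw [hk4 (fun h => hnc (hc4.mp h)), hu3 _ hx hp43, hu2 _ hx hp42, hu1 _ hx hp41]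
    · rw [hadj] at hax
      push_neg at hax
      rw [hu4 _ hx hax.2.2.2, hu3 _ hx hax.2.2.1, hu2 _ hx hax.2.1, hu1 _ hx hax.1]
  · -- the appended queue entries
    have q1 : ∃ n1, s1.2 = st.2 ++ n1 ∧ ∀ x, x ∈ n1 ↔ (x = (i, j+1) ∧ CandZ arr st.1 (i, j+1)) := by
      by_cases hc : CandZ arr st.1 (i, j+1)
      · obtain ⟨-, hq⟩ := hs1 hc
        exact ⟨[(i, j+1)], hq, fun x => by simp [hc]⟩
      · rw [hk1 hc]
        exact ⟨[], by simp, fun x => by simp [hc]⟩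
    have q2 : ∃ n2, s2.2 = s1.2 ++ n2 ∧ ∀ x, x ∈ n2 ↔ (x = (i+1, j) ∧ CandZ arr st.1 (i+1, j)) := by
      by_cases hc : CandZ arr st.1 (i+1, j)
      · obtain ⟨-, hq⟩ := hs2 (hc2.mpr hc)
        exact ⟨[(i+1, j)], hq, fun x => by simp [hc]⟩
      · rw [hk2 (fun h => hc (hc2.mp h))]
        exact ⟨[], by simp, fun x => by simp [hc]⟩
    have q3 : ∃ n3, s3.2 = s2.2 ++ n3 ∧ ∀ x, x ∈ n3 ↔ (x = (i, j-1) ∧ CandZ arr st.1 (i, j-1)) := by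
      by_cases hc : CandZ arr st.1 (i, j-1)
      · obtain ⟨-, hq⟩ := hs3 (hc3.mpr hc)
        exact ⟨[(i, j-1)], hq, fun x => by simp [hc]⟩
      · rw [hk3 (fun h => hc (hc3.mp h))]
        exact ⟨[], by simp, fun x => by simp [hc]⟩
    have q4 : ∃ n4, s4.2 = s3.2 ++ n4 ∧ ∀ x, x ∈ n4 ↔ (x = (i-1, j) ∧ CandZ arr st.1 (i-1, j)) := by
      by_cases hc : CandZ arr st.1 (i-1, j)
      · obtain ⟨-, hq⟩ := hs4 (hc4.mpr hc)
        exact ⟨[(i-1, j)], hq, fun x => by simp [hc]⟩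
      · rw [hk4 (fun h => hc (hc4.mp h))]
        exact ⟨[], by simp, fun x => by simp [hc]⟩
    obtain ⟨n1, hq1e, hn1⟩ := q1
    obtain ⟨n2, hq2e, hn2⟩ := q2
    obtain ⟨n3, hq3e, hn3⟩ := q3
    obtain ⟨n4, hq4e, hn4⟩ := q4
    refine ⟨n1 ++ n2 ++ n3 ++ n4, ?_, ?_⟩
    · rw [hq4e, hq3e, hq2e, hq1e]
      simp [List.append_assoc]
    · intro x
      simp only [List.mem_append, hn1 x, hn2 x, hn3 x, hn4 x, hadj x]
      constructor
      · rintro (((⟨rfl, hc⟩ | ⟨rfl, hc⟩) | ⟨rfl, hc⟩) | ⟨rfl, hc⟩)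
        · exact ⟨Or.inl rfl, hc⟩
        · exact ⟨Or.inr (Or.inl rfl), hc⟩
        · exact ⟨Or.inr (Or.inr (Or.inl rfl)), hc⟩
        · exact ⟨Or.inr (Or.inr (Or.inr rfl)), hc⟩
      · rintro ⟨(rfl | rfl | rfl | rfl), hc⟩
        · exact Or.inl (Or.inl (Or.inl ⟨rfl, hc⟩))
        · exact Or.inl (Or.inl (Or.inr ⟨rfl, hc⟩))
        · exact Or.inl (Or.inr ⟨rfl, hc⟩)
        · exact Or.inr ⟨rfl, hc⟩

theorem blevel_spec {arr : List (List Int)} {d : Int} :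
    ∀ (Q : List (Int × Int)) (m : List (List (Option Int))) (acc : List (Int × Int)),
    DimsD arr m →
    (DimsD arr ((Q.foldl (fun st (p : Int × Int) =>
        fill4 arr arr.length (ColsN arr) d st p.1 p.2) (m, acc)).1) ∧
     (∀ x, InGrid arr x → ¬ (∃ cq ∈ Q, Adj cq x) →
       dget (Q.foldl (fun st (p : Int × Int) =>
         fill4 arr arr.length (ColsN arr) d st p.1 p.2) (m, acc)).1 x.1.toNat x.2.toNat =
       dget m x.1.toNat x.2.toNat) ∧
     (∀ x, (∃ cq ∈ Q, Adj cq x) → CandZ arr m x →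
       dget (Q.foldl (fun st (p : Int × Int) =>
         fill4 arr arr.length (ColsN arr) d st p.1 p.2) (m, acc)).1 x.1.toNat x.2.toNat = some d) ∧
     (∀ x, InGrid arr x → ¬ CandZ arr m x →
       dget (Q.foldl (fun st (p : Int × Int) =>
         fill4 arr arr.length (ColsN arr) d st p.1 p.2) (m, acc)).1 x.1.toNat x.2.toNat =
       dget m x.1.toNat x.2.toNat) ∧
     (∃ ns, (Q.foldl (fun st (p : Int × Int) =>
         fill4 arr arr.length (ColsN arr) d st p.1 p.2) (m, acc)).2 = acc ++ ns ∧
       ∀ x, x ∈ ns ↔ ((∃ cq ∈ Q, Adj cq x) ∧ CandZ arr m x))) := by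
  intro Q
  induction Q with
  | nil =>
    intro m acc hd
    refine ⟨hd, fun x _ _ => rfl, ?_, fun x _ _ => rfl, [], by simp, ?_⟩
    · rintro x ⟨cq, hcq, -⟩ _
      exact absurd hcq (List.not_mem_nil)
    · intro x
      simp
  | cons a rest ih =>
    intro m acc hd
    rcases a with ⟨ai, aj⟩
    have F := @fill4_spec arr d (m, acc) ai aj hd
    dsimp only at F
    generalize hF : fill4 arr arr.length (ColsN arr) d (m, acc) ai aj = s1 at F
    obtain ⟨fd, fu, fs, fk, ns1, hq1, hn1⟩ := F
    have hfold : ((ai, aj) :: rest).foldl (fun st (p : Int × Int) =>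
        fill4 arr arr.length (ColsN arr) d st p.1 p.2) (m, acc) =
        rest.foldl (fun st (p : Int × Int) =>
          fill4 arr arr.length (ColsN arr) d st p.1 p.2) (s1.1, s1.2) := by
      rw [List.foldl_cons, hF]
    rw [hfold]
    have IH := ih s1.1 s1.2 fd
    obtain ⟨ihd, ihu, ihs, ihk, ns2, hq2, hn2⟩ := IH
    -- change of base from s1.1 to m, for cells the first step did not touch
    have hcz1 : ∀ x, InGrid arr x → ¬ (Adj (ai, aj) x ∧ CandZ arr m x) →
        dget s1.1 x.1.toNat x.2.toNat = dget m x.1.toNat x.2.toNat := by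
      intro x hx hne
      by_cases hax : Adj (ai, aj) x
      · by_cases hcx : CandZ arr m x
        · exact absurd ⟨hax, hcx⟩ hne
        · exact fk x hx hcx
      · exact fu x hx hax
    have hcziff : ∀ x, InGrid arr x → ¬ (Adj (ai, aj) x ∧ CandZ arr m x) →
        (CandZ arr s1.1 x ↔ CandZ arr m x) := by
      intro x hx hne
      unfold CandZ
      rw [hcz1 x hx hne]
    refine ⟨ihd, ?_, ?_, ?_, ?_⟩
    · intro x hx hnq
      push_neg at hnq
      simp only [List.mem_cons] at hnq
      have hnone : ¬ Adj (ai, aj) x := hnq (ai, aj) (Or.inl rfl)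
      rw [ihu x hx ?_, fu x hx hnone]
      rintro ⟨cq, hcq, hadj⟩
      exact hnq cq (Or.inr hcq) hadj
    · rintro x ⟨cq, hcq, hadjx⟩ hcx
      have hgx : InGrid arr x := hcx.1.1
      by_cases hax : Adj (ai, aj) x
      · have hv1 : dget s1.1 x.1.toNat x.2.toNat = some d := fs x hax hcx
        have : ¬ CandZ arr s1.1 x := by
          unfold CandZ
          rw [hv1]
          rintro ⟨-, h⟩
          simp at h
        rw [ihk x hgx this, hv1]
      · have hv1 : dget s1.1 x.1.toNat x.2.toNat = dget m x.1.toNat x.2.toNat :=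
          fu x hgx hax
        rcases List.mem_cons.mp hcq with rfl | hcq'
        · exact absurd hadjx hax
        · have hcx1 : CandZ arr s1.1 x := by
            unfold CandZ
            rw [hv1]
            exact hcx
          exact ihs x ⟨cq, hcq', hadjx⟩ hcx1
    · intro x hx hnc
      have h1 : dget s1.1 x.1.toNat x.2.toNat = dget m x.1.toNat x.2.toNat :=
        hcz1 x hx (fun h => hnc h.2)
      have h2 : ¬ CandZ arr s1.1 x := by
        unfold CandZ at hnc ⊢
        rw [h1]
        exact hnc
      rw [ihk x hx h2, h1]
    · refine ⟨ns1 ++ ns2, by rw [hq2, hq1, List.append_assoc], ?_⟩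
      intro x
      simp only [List.mem_append, hn1 x, hn2 x]
      constructor
      · rintro (⟨hax, hcx⟩ | ⟨⟨cq, hcq, hadjx⟩, hcx1⟩)
        · exact ⟨⟨(ai, aj), List.mem_cons_self, hax⟩, hcx⟩
        · have hgx : InGrid arr x := hcx1.1.1
          have hnot : ¬ (Adj (ai, aj) x ∧ CandZ arr m x) := by
            rintro ⟨hax, hcm⟩
            have := fs x hax hcm
            unfold CandZ at hcx1
            rw [this] at hcx1
            obtain ⟨-, h⟩ := hcx1
            simp at h
          exact ⟨⟨cq, List.mem_cons_of_mem _ hcq, hadjx⟩,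
            (hcziff x hgx hnot).mp hcx1⟩
      · rintro ⟨⟨cq, hcq, hadjx⟩, hcx⟩
        have hgx : InGrid arr x := hcx.1.1
        by_cases hax : Adj (ai, aj) x
        · exact Or.inl ⟨hax, hcx⟩
        · rcases List.mem_cons.mp hcq with rfl | hcq'
          · exact absurd hadjx hax
          · refine Or.inr ⟨⟨cq, hcq', hadjx⟩, ?_⟩
            exact (hcziff x hgx (fun h => hax h.1)).mpr hcx

theorem ball_empty {arr : List (List Int)} (h : ∀ z, ¬ IsZero arr z) :
    ∀ n x, ¬ Ball arr (IsZero arr) n x := by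
  intro n
  induction n with
  | zero => exact h
  | succ n ihn =>
    rintro x (hb | ⟨-, q, hq, -⟩)
    · exact ihn x hb
    · exact ihn q hq

theorem frZ_ball {arr : List (List Int)} {c : Nat} {x : Int × Int}
    (h : FrZ arr c x) : Ball arr (IsZero arr) c x := by
  cases c with
  | zero => exact h
  | succ k => exact h.1

theorem hdecompZ {arr : List (List Int)} {c : Nat} {x : Int × Int}
    (hb : Ball arr (IsZero arr) (c+1) x) (hnb : ¬ Ball arr (IsZero arr) c x) :
    Pass arr x ∧ ∃ b, FrZ arr c b ∧ Adj b x := by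
  rcases hb with hb | ⟨hpx, b, hbb, hab⟩
  · exact absurd hb hnb
  · refine ⟨hpx, b, ?_, hab⟩
    match c with
    | 0 => exact hbb
    | k+1 =>
      exact ⟨hbb, fun hbk => hnb (Or.inr ⟨hpx, b, hbk, hab⟩)⟩

theorem bWhile_spec {arr : List (List Int)} :
    ∀ (fuel c : Nat) (dist : List (List (Option Int))) (queue : List (Int × Int)),
    MInv arr c dist →
    (∀ x, x ∈ queue ↔ FrZ arr c x) →
    DimsD arr dist →
    arr.length * ColsN arr + 1 ≤ fuel + c →
    c ≤ arr.length * ColsN arr →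
    (queue ≠ [] → c + 1 ≤ MeasD arr dist) →
    FinalChar arr (bWhile arr arr.length (ColsN arr) fuel (c : Int) dist queue) := by
  intro fuel
  induction fuel with
  | zero =>
    intro c dist queue _ _ _ hfuel hc _
    exfalso; omega
  | succ fuel ih =>
    intro c dist queue hm hq hd hfuel hc hM
    by_cases hqe : queue = []
    · subst hqe
      have hres : bWhile arr arr.length (ColsN arr) (fuel+1) (c : Int) dist [] = dist := rfl
      rw [hres]
      have hnoball : ∀ d p, Ball arr (IsZero arr) d p → Ball arr (IsZero arr) c p := by
        match c with
        | 0 =>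
          have hnz : ∀ z, ¬ IsZero arr z := fun z hz => by
            have := (hq z).mpr hz
            exact absurd this (List.not_mem_nil)
          intro d p hb
          exact absurd hb (ball_empty hnz d p)
        | k+1 =>
          have hstab : ∀ x, Ball arr (IsZero arr) (k+1) x ↔ Ball arr (IsZero arr) k x := by
            intro x
            constructor
            · intro hb
              by_contra hnb
              exact absurd ((hq x).mpr ⟨hb, hnb⟩) (List.not_mem_nil)
            · exact ball_mono (by omega)
          intro d p hb
          rcases Nat.le_total d (k+1) with h' | h'
          · exact ball_mono h' hb
          · exact ball_mono (by omega) ((ball_stab hstab d (by omega) p).mp hb)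
      intro p hp
      by_cases hbc : Ball arr (IsZero arr) c p
      · obtain ⟨k, hk, hld⟩ := exists_least hbc
        exact Or.inr ⟨k, hm.2 p k hp hld hk, hld⟩
      · exact Or.inl ⟨hm.1 p hp hbc, fun d hb => hbc (hnoball d p hb)⟩
    · have hres : bWhile arr arr.length (ColsN arr) (fuel+1) (c : Int) dist queue =
          bWhile arr arr.length (ColsN arr) fuel ((c : Int)+1)
            (queue.foldl (fun st (p : Int × Int) =>
              fill4 arr arr.length (ColsN arr) ((c : Int)+1) st p.1 p.2) (dist, [])).1
            (queue.foldl (fun st (p : Int × Int) =>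
              fill4 arr arr.length (ColsN arr) ((c : Int)+1) st p.1 p.2) (dist, [])).2 := by
        show (if queue.isEmpty = true then dist else _) = _
        rw [if_neg (by simpa [List.isEmpty_iff] using hqe)]
      rw [hres]
      obtain ⟨ld, lu, ls, lk, ns, hqs, hns⟩ :=
        @blevel_spec arr ((c : Int)+1) queue dist [] hd
      -- new invariants at level c+1
      have hI1 : MInv arr (c+1) (queue.foldl (fun st (p : Int × Int) =>
          fill4 arr arr.length (ColsN arr) ((c : Int)+1) st p.1 p.2) (dist, [])).1 := by
        constructor
        · intro p hp hnb
          have hnbc : ¬ Ball arr (IsZero arr) c p := fun hb => hnb (ball_mono (by omega) hb)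
          have hnone := hm.1 p hp hnbc
          by_cases hpass : Pass arr p
          · have hnadj : ¬ (∃ cq ∈ queue, Adj cq p) := by
              rintro ⟨cq, hcq, hadj⟩
              exact hnb (Or.inr ⟨hpass, cq, frZ_ball ((hq cq).mp hcq), hadj⟩)
            rw [lu p hp hnadj]
            exact hnone
          · have hnc : ¬ CandZ arr dist p := fun h => hpass h.1
            rw [lk p hp hnc]
            exact hnone
        · intro p k hp hld hk
          rcases Nat.lt_or_ge k (c+1) with hkc | hkc
          · have hsome := hm.2 p k hp hld (by omega)
            have hnc : ¬ CandZ arr dist p := by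
              rintro ⟨-, hnone⟩
              rw [hsome] at hnone
              simp at hnone
            rw [lk p hp hnc, hsome]
          · have hkeq : k = c + 1 := by omega
            subst hkeq
            obtain ⟨hpass, b, hfr, hadj⟩ := hdecompZ hld.1 (hld.2 c (by omega))
            have hnone := hm.1 p hp (hld.2 c (by omega))
            have hres2 := ls p ⟨b, (hq b).mpr hfr, hadj⟩ ⟨hpass, hnone⟩
            rw [hres2]
            push_cast
            rfl
      have hI2 : ∀ x, x ∈ (queue.foldl (fun st (p : Int × Int) =>
          fill4 arr arr.length (ColsN arr) ((c : Int)+1) st p.1 p.2) (dist, [])).2 ↔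
          FrZ arr (c+1) x := by
        intro x
        rw [hqs]
        simp only [List.nil_append]
        rw [hns x]
        constructor
        · rintro ⟨⟨cq, hcq, hadj⟩, hpass, hnone⟩
          have hgx : InGrid arr x := hpass.1
          have hnbc : ¬ Ball arr (IsZero arr) c x := by
            intro hb
            obtain ⟨k, hk, hld⟩ := exists_least hb
            rw [hm.2 x k hgx hld hk] at hnone
            simp at hnone
          exact ⟨Or.inr ⟨hpass, cq, frZ_ball ((hq cq).mp hcq), hadj⟩, hnbc⟩
        · rintro ⟨hb, hnb⟩
          obtain ⟨hpass, b, hfr, hadj⟩ := hdecompZ hb hnb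
          exact ⟨⟨b, (hq b).mpr hfr, hadj⟩, hpass, hm.1 x hpass.1 hnb⟩
      have hMv : c + 1 ≤ MeasD arr dist := hM hqe
      have hc' : c + 1 ≤ arr.length * ColsN arr := le_trans hMv measD_le
      have hM' : (queue.foldl (fun st (p : Int × Int) =>
          fill4 arr arr.length (ColsN arr) ((c : Int)+1) st p.1 p.2) (dist, [])).2 ≠ [] →
          c + 2 ≤ MeasD arr (queue.foldl (fun st (p : Int × Int) =>
            fill4 arr arr.length (ColsN arr) ((c : Int)+1) st p.1 p.2) (dist, [])).1 := by
        intro hne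
        obtain ⟨x, hxq⟩ := List.exists_mem_of_ne_nil _ hne
        rw [hqs] at hxq
        simp only [List.nil_append] at hxq
        obtain ⟨hadjq, hpass, hnone⟩ := (hns x).mp hxq
        have hgx : InGrid arr x := hpass.1
        have hlt : MeasD arr dist < MeasD arr (queue.foldl (fun st (p : Int × Int) =>
            fill4 arr arr.length (ColsN arr) ((c : Int)+1) st p.1 p.2) (dist, [])).1 := by
          apply measD_lt
          · intro i j hi hj hs
            have hg : InGrid arr ((i : Int), (j : Int)) := ⟨by omega, by omega, by omega, by omega⟩
            have hnc : ¬ CandZ arr dist ((i : Int), (j : Int)) := by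
              rintro ⟨-, hn⟩
              simp only [Int.toNat_natCast] at hn
              rw [hn] at hs
              simp at hs
            have := lk _ hg hnc
            simp only [Int.toNat_natCast] at this
            rw [this]
            exact hs
          · obtain ⟨hi, hj, hpe⟩ := grid_coords hgx
            refine ⟨x.1.toNat, x.2.toNat, hi, hj, ?_, ?_⟩
            · have := ls x hadjq ⟨hpass, hnone⟩
              rw [this]
              rfl
            · rw [hnone]
              simp
        omega
      have IH := ih (c+1) _ _ hI1 hI2 ld (by omega) hc' hM'
      have hcast : (((c+1 : Nat)) : Int) = ((c : Int)+1) := by push_cast; rfl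
      rw [hcast] at IH
      exact IH

theorem alt_final {arr : List (List Int)} :
    FinalChar arr (bWhile arr arr.length (ColsN arr) (arr.length * ColsN arr + 1) 0
      ((List.range arr.length).map (fun (r : Nat) =>
        (List.range (ColsN arr)).map (fun (c : Nat) =>
          if getCell arr (↑r) (↑c) == 0 then some (0 : Int) else none)))
      ((List.range arr.length).flatMap (fun (r : Nat) =>
        ((List.range (ColsN arr)).filter (fun (c : Nat) => getCell arr (↑r) (↑c) == 0)).map
          (fun (c : Nat) => ((r : Int), (c : Int)))))) := by
  have hm0 : MInv arr 0 ((List.range arr.length).map (fun (r : Nat) =>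
      (List.range (ColsN arr)).map (fun (c : Nat) =>
        if getCell arr (↑r) (↑c) == 0 then some (0 : Int) else none))) := by
    constructor
    · intro p hp hnb
      obtain ⟨hi, hj, hpe⟩ := grid_coords hp
      rw [dget_map, if_pos ⟨hi, hj⟩]
      rw [if_neg]
      intro hc
      rw [beq_iff_eq] at hc
      apply hnb
      show IsZero arr p
      refine ⟨hp, ?_⟩
      show getCell arr p.1 p.2 = 0
      rw [hpe]
      exact hc
    · intro p k hp hld hk
      have hk0 : k = 0 := by omega
      subst hk0
      have hz : IsZero arr p := hld.1
      obtain ⟨hi, hj, hpe⟩ := grid_coords hp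
      rw [dget_map, if_pos ⟨hi, hj⟩]
      rw [if_pos]
      · simp
      · rw [beq_iff_eq]
        show getCell arr ((p.1.toNat : Nat) : Int) ((p.2.toNat : Nat) : Int) = 0
        have hcz : getCell arr p.1 p.2 = 0 := hz.2
        have e1 : ((p.1.toNat : Nat) : Int) = p.1 := Int.toNat_of_nonneg hp.1
        have e2 : ((p.2.toNat : Nat) : Int) = p.2 := Int.toNat_of_nonneg hp.2.2.1
        rw [e1, e2]
        exact hcz
  have hd0 : DimsD arr ((List.range arr.length).map (fun (r : Nat) =>
      (List.range (ColsN arr)).map (fun (c : Nat) =>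
        if getCell arr (↑r) (↑c) == 0 then some (0 : Int) else none))) := by
    constructor
    · simp
    · intro r hr
      obtain ⟨i, -, rfl⟩ := List.mem_map.mp hr
      simp
  have hq0 : ∀ x, x ∈ ((List.range arr.length).flatMap (fun (r : Nat) =>
      ((List.range (ColsN arr)).filter (fun (c : Nat) => getCell arr (↑r) (↑c) == 0)).map
        (fun (c : Nat) => ((r : Int), (c : Int))))) ↔ FrZ arr 0 x := by
    intro x
    show _ ↔ IsZero arr x
    simp only [List.mem_flatMap, List.mem_map, List.mem_filter, List.mem_range]
    constructor
    · rintro ⟨r, hr, c, ⟨hc, hz⟩, rfl⟩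
      rw [beq_iff_eq] at hz
      exact ⟨⟨by omega, by omega, by omega, by omega⟩, hz⟩
    · rintro ⟨hg, hz⟩
      obtain ⟨hi, hj, hpe⟩ := grid_coords hg
      refine ⟨x.1.toNat, hi, x.2.toNat, ⟨hj, ?_⟩, hpe.symm⟩
      rw [beq_iff_eq]
      show getCell arr ((x.1.toNat : Nat) : Int) ((x.2.toNat : Nat) : Int) = 0
      rw [Int.toNat_of_nonneg hg.1, Int.toNat_of_nonneg hg.2.2.1]
      exact hz
  have H := @bWhile_spec arr (arr.length * ColsN arr + 1) 0 _ _ hm0 hq0 hd0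
    (by omega) (by omega) ?hm
  · simpa using H
  case hm =>
    intro hne
    obtain ⟨x, hx⟩ := List.exists_mem_of_ne_nil _ hne
    have hz : IsZero arr x := (hq0 x).mp hx
    apply measD_pos
    refine ⟨x, hz.1, ?_⟩
    obtain ⟨hi, hj, hpe⟩ := grid_coords hz.1
    rw [dget_map, if_pos ⟨hi, hj⟩, if_pos]
    · rfl
    · rw [beq_iff_eq]
      show getCell arr ((x.1.toNat : Nat) : Int) ((x.2.toNat : Nat) : Int) = 0
      rw [Int.toNat_of_nonneg hz.1.1, Int.toNat_of_nonneg hz.1.2.2.1]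
      exact hz.2

-- ---- final assembly ----

theorem cell_eq {arr : List (List Int)} {r0 c0 : Nat}
    (hr : r0 < arr.length) (hc : c0 < ColsN arr)
    (hcell : cellP arr ((r0 : Int), (c0 : Int)) = 1)
    {m : List (List (Option Int))} (hfin : FinalChar arr m) :
    bfs arr arr.length (ColsN arr) (r0 : Int) (c0 : Int) = dget m r0 c0 := by
  have hg : InGrid arr ((r0 : Int), (c0 : Int)) := ⟨by omega, by omega, by omega, by omega⟩
  have hpass : Pass arr ((r0 : Int), (c0 : Int)) := by
    refine ⟨hg, ?_⟩
    rw [hcell]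
    decide
  have hA := bfs_correct hr hc hcell
  have hfp := hfin ((r0 : Int), (c0 : Int)) hg
  have htn : dget m ((r0 : Int), (c0 : Int)).1.toNat ((r0 : Int), (c0 : Int)).2.toNat =
      dget m r0 c0 := by simp
  rw [htn] at hfp
  have hhit : ∀ d, Hit arr ((r0 : Int), (c0 : Int)) d ↔
      Ball arr (IsZero arr) d ((r0 : Int), (c0 : Int)) := fun d => hit_iff_ballZ hpass d
  rcases hfp with ⟨hnone, hnb⟩ | ⟨k, hsome, hld⟩
  · rcases hA with ⟨ha, -⟩ | ⟨d, -, -, hhitd, -⟩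
    · rw [ha, hnone]
    · exact absurd ((hhit d).mp hhitd) (hnb d)
  · rcases hA with ⟨-, hnall⟩ | ⟨d, hd0, ho, hhitd, hleast⟩
    · exact absurd ((hhit k).mpr hld.1) (hnall k)
    · have hdk : d = k := by
        by_contra hne
        rcases Nat.lt_or_ge d k with h | h
        · exact hld.2 d h ((hhit d).mp hhitd)
        · exact hleast k (by omega) ((hhit k).mpr hld.1)
      rw [ho, hdk, hsome]

-- ===== VERDICT (by name: the statement is the Claim_ definition above) =====
theorem distance_to_rabbit_holes_spec : Claim_equal_distance_to_rabbit_holes := by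
  intro arr _ _
  unfold Spec_distance_to_rabbit_holes
  unfold distance_to_rabbit_holes distance_to_rabbit_holes_alt
  show (List.range arr.length).map (fun (row : Nat) =>
      (List.range (ColsN arr)).map (fun (col : Nat) =>
        if getCell arr (↑row) (↑col) == 1
        then bfs arr arr.length (ColsN arr) (↑row) (↑col)
        else some (getCell arr (↑row) (↑col)))) =
    (List.range arr.length).map (fun (r : Nat) =>
      (List.range (ColsN arr)).map (fun (c : Nat) =>
        if getCell arr (↑r) (↑c) == 1
        then dget (if (List.range arr.length).any (fun (r : Nat) =>
              (List.range (ColsN arr)).any (fun (c : Nat) => getCell arr (↑r) (↑c) == 1)) then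
            bWhile arr arr.length (ColsN arr) (arr.length * ColsN arr + 1) 0
              ((List.range arr.length).map (fun (r : Nat) =>
                (List.range (ColsN arr)).map (fun (c : Nat) =>
                  if getCell arr (↑r) (↑c) == 0 then some (0 : Int) else none)))
              ((List.range arr.length).flatMap (fun (r : Nat) =>
                ((List.range (ColsN arr)).filter
                  (fun (c : Nat) => getCell arr (↑r) (↑c) == 0)).map
                  (fun (c : Nat) => ((r : Int), (c : Int)))))
          else ((List.range arr.length).map (fun (r : Nat) =>
            (List.range (ColsN arr)).map (fun (c : Nat) =>
              if getCell arr (↑r) (↑c) == 0 then some (0 : Int) else none)))) r c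
        else some (getCell arr (↑r) (↑c))))
  apply List.map_congr_left
  intro r hrm
  apply List.map_congr_left
  intro c hcm
  rw [List.mem_range] at hrm hcm
  by_cases h1 : (getCell arr (↑r) (↑c) == 1) = true
  · rw [if_pos h1, if_pos h1]
    have hany : ((List.range arr.length).any (fun (r : Nat) =>
        (List.range (ColsN arr)).any (fun (c : Nat) => getCell arr (↑r) (↑c) == 1))) = true := by
      rw [List.any_eq_true]
      refine ⟨r, List.mem_range.mpr hrm, ?_⟩
      rw [List.any_eq_true]
      exact ⟨c, List.mem_range.mpr hcm, h1⟩
    rw [if_pos hany]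
    exact cell_eq hrm hcm (beq_iff_eq.mp h1) alt_final
  · rw [if_neg h1, if_neg h1]
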